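-- pv_equiv track=rewrite | github.com/981377660LMT/algorithm-study | 6_tree/树状数组/经典题/F - Substring of Sorted String.py | subStringOfSortedString
-- ===== SOURCE A (Python) =====
-- from typing import List, Tuple, Union
-- from typing import List, Sequence, Union
--
-- def subStringOfSortedString(s: str, operations: List[Tuple[int, int, int]]) -> List[bool]:
--     n = len(s)
--     ords = [ord(c) for c in s]
--     down = BITArray(n)  # 这个位置是否出现下降 0/1数组
--     indexes = [BITArray(n) for _ in range(26)]  # 每个字母出现的位置
--     for i, c in enumerate(s):
--         indexes[ord(c) - 97].add(i + 1, 1)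
--         if i > 0 and ord(c) < ord(s[i - 1]):
--             down.add(i + 1, 1)
--
--     def add(index: int, ord_: int, delta: int) -> None:
--         indexes[ord_ - 97].add(index + 1, delta)
--         if index > 0 and ords[index - 1] > ord_:  # 下降了
--             down.add(index + 1, delta)
--         if index + 1 < n and ords[index + 1] < ord_:  # 下降了
--             down.add((index + 1) + 1, delta)
--
--     res = []
--     for i, (op, a, b) in enumerate(operations):
--         if op == 1:
--             index, ord_ = a - 1, b
--             add(index, ords[index], -1)
--             ords[index] = ord_
--             add(index, ord_, 1)
--         else:
--             left, right = a, b
--             hasDown = down.queryRange(left + 1, right) != 0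
--             if hasDown:
--                 res.append(False)
--                 continue
--
--             first, last = ords[left - 1] - 97, ords[right - 1] - 97
--             ok = True
--             for i in range(first + 1, last):
--                 if indexes[i].queryRange(left, right) != indexes[i].queryRange(1, n):
--                     ok = False
--                     break
--             res.append(ok)
--
--     return res
--
-- class BITArray:
--     """Point Add Range Sum, 1-indexed."""
--
--     @staticmethod
--     def _build(sequence: Sequence[int]) -> List[int]:
--         tree = [0] * (len(sequence) + 1)
--         for i in range(1, len(tree)):
--             tree[i] += sequence[i - 1]
--             parent = i + (i & -i)
--             if parent < len(tree):
--                 tree[parent] += tree[i]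
--         return tree
--
--     __slots__ = ("_n", "_tree")
--
--     def __init__(self, lenOrSequence: Union[int, Sequence[int]]):
--         if isinstance(lenOrSequence, int):
--             self._n = lenOrSequence
--             self._tree = [0] * (lenOrSequence + 1)
--         else:
--             self._n = len(lenOrSequence)
--             self._tree = self._build(lenOrSequence)
--
--     def add(self, index: int, delta: int) -> None:
--         # assert index >= 1, f'add index must be greater than 0, but got {index}'
--         while index <= self._n:
--             self._tree[index] += delta
--             index += index & -index
--
--     def query(self, right: int) -> int:
--         """Query sum of [1, right]."""
--         if right > self._n:
--             right = self._n
--         res = 0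
--         while right > 0:
--             res += self._tree[right]
--             right -= right & -right
--         return res
--
--     def queryRange(self, left: int, right: int) -> int:
--         """Query sum of [left, right]."""
--         return self.query(right) - self.query(left - 1)
--
--     def __len__(self) -> int:
--         return self._n
--
--     def __repr__(self) -> str:
--         nums = []
--         for i in range(1, self._n + 1):
--             nums.append(self.queryRange(i, i))
--         return f"BITArray({nums})"
-- ===== SOURCE B (Python) =====
-- import bisect
-- from typing import List, Tuple
--
--
-- def subStringOfSortedString(s: str, operations: List[Tuple[int, int, int]]) -> List[bool]:
--     n = len(s)
--     ords = [ord(c) for c in s]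
--     pos = [[] for _ in range(26)]  # sorted list of positions per letter
--     for i, v in enumerate(ords):
--         pos[v - 97].append(i)
--     downs = [i for i in range(1, n) if ords[i] < ords[i - 1]]  # sorted descent positions
--
--     def fix_down(i):
--         j = bisect.bisect_left(downs, i)
--         present = j < len(downs) and downs[j] == i
--         if 0 < i < n and ords[i] < ords[i - 1]:
--             if not present:
--                 downs.insert(j, i)
--         elif present:
--             downs.pop(j)
--
--     res = []
--     for op, a, b in operations:
--         if op == 1:
--             i = a - 1
--             old = pos[ords[i] - 97]
--             old.pop(bisect.bisect_left(old, i))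
--             ords[i] = b
--             bisect.insort(pos[b - 97], i)
--             fix_down(i)
--             fix_down(i + 1)
--         else:
--             left, right = a, b
--             if bisect.bisect_left(downs, left) != bisect.bisect_left(downs, right):
--                 res.append(False)
--                 continue
--             first, last = ords[left - 1] - 97, ords[right - 1] - 97
--             ok = True
--             for k in range(first + 1, last):
--                 lst = pos[k]
--                 if bisect.bisect_right(lst, right - 1) - bisect.bisect_left(lst, left - 1) != len(lst):
--                     ok = False
--                     break
--             res.append(ok)
--     return res
-- ===== Notes on version B (the rewrite author's own statement) =====
-- stated objective: alternative
-- what changed: B replaces A's 26 per-letter Fenwick trees and the descent Fenwick tree by per-letter sorted position lists and a sorted list of descent positions maintained with bisect: a range occurrence count is bisect_right minus bisect_left, the global count is the list length, and an update removes/reinserts one position and recomputes the two affected descent markers; …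
-- outside the precondition, e.g. on subStringOfSortedString('ba', [(2, -5, 2)]): A returns [False], B returns [False]; on subStringOfSortedString('ab', [(1, 0, 99)]): A does not finish within the time limit, B returns []
import Mathlib
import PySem

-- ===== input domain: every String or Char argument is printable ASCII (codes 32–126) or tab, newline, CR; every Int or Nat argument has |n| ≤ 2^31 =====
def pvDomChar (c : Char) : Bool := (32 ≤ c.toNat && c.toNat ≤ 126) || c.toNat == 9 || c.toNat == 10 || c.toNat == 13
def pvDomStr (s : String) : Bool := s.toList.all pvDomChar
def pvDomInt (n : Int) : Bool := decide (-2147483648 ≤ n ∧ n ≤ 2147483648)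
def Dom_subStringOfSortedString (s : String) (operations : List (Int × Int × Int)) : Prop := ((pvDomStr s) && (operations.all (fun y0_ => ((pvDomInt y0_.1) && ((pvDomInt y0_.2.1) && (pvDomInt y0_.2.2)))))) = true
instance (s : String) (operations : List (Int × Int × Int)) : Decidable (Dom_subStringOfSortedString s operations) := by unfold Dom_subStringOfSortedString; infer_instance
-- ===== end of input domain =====

-- B replaces A's 26+1 Fenwick trees by per-letter sorted position lists and a sorted list of
-- descent positions, maintained with bisect (an alternative data structure, not claimed faster).

-- ===== PORT A =====

-- `i & -i` of Python, ported arithmetically (exact for every Nat: lowest set bit, 0 at 0)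
def pvLb (i : Nat) : Nat :=
  if h : i = 0 then 0
  else if i % 2 = 1 then 1 else 2 * pvLb (i / 2)
termination_by i
decreasing_by exact Nat.div_lt_self (Nat.pos_of_ne_zero h) (by omega)

-- termination helper for the BIT loops (cited by `decreasing_by` below)
theorem pvLb_pos (i : Nat) (h : 1 ≤ i) : 1 ≤ pvLb i := by
  induction i using Nat.strong_induction_on with
  | _ i ih =>
    unfold pvLb
    split
    · omega
    · split
      · omega
      · rename_i h0 _
        have := ih (i / 2) (Nat.div_lt_self (Nat.pos_of_ne_zero h0) (by omega))
          (by omega)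
        omega

-- BITArray.add: `while index <= n: tree[index] += delta; index += index & -index`
-- (guard `1 ≤ idx` only makes the function total: Python loops forever at index 0, excluded by Pre_)
def pvBitAdd (n : Nat) (tree : List Int) (idx : Nat) (delta : Int) : List Int :=
  if h : 1 ≤ idx ∧ idx ≤ n then
    pvBitAdd n (tree.set idx (tree.getD idx 0 + delta)) (idx + pvLb idx) delta
  else tree
termination_by n + 1 - idx
decreasing_by have := pvLb_pos idx h.1; omega

-- BITArray.query's loop: `while right > 0: res += tree[right]; right -= right & -right`
def pvBitQueryAux (tree : List Int) (r : Nat) : Int :=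
  if h : r = 0 then 0
  else tree.getD r 0 + pvBitQueryAux tree (r - pvLb r)
termination_by r
decreasing_by have := pvLb_pos r (by omega); omega

-- BITArray.query: clamps right to n first; negative right never enters the loop
def pvBitQuery (n : Nat) (tree : List Int) (right : Int) : Int :=
  pvBitQueryAux tree (min right (n : Int)).toNat

def pvBitQueryRange (n : Nat) (tree : List Int) (left right : Int) : Int :=
  pvBitQuery n tree right - pvBitQuery n tree (left - 1)

-- the nested `add(index, ord_, delta)` of A (ords is the current list; indices in range under Pre_)
def pvAddA (n : Nat) (ords down : List Int) (idxs : List (List Int)) (index ord_ delta : Int) :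
    List Int × List (List Int) :=
  -- `indexes[ord_ - 97]`: Python wraps a negative list index, so for -26 ≤ ord_-97 < 26 the
  -- accessed cell is (ord_-97) % 26 (exact inside Pre_, where ord_ ∈ [71, 122])
  let idxs' := idxs.set (PySem.Int.mod (ord_ - 97) 26).toNat
      (pvBitAdd n (idxs.getD (PySem.Int.mod (ord_ - 97) 26).toNat []) (index + 1).toNat delta)
  let down1 := if 0 < index ∧ PySem.List.pyGetD ords (index - 1) 0 > ord_ then
      pvBitAdd n down (index + 1).toNat delta else down
  let down2 := if index + 1 < (n : Int) ∧ PySem.List.pyGetD ords (index + 1) 0 < ord_ then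
      pvBitAdd n down1 ((index + 1) + 1).toNat delta else down1
  (down2, idxs')

-- `for i, c in enumerate(s): indexes[ord(c)-97].add(i+1, 1); if i > 0 and ord(c) < ord(s[i-1]): down.add(i+1, 1)`
-- (enumerates the ord list: identical pairs, since ords = [ord(c) for c in s] and is unmodified here)
def pvBuildA (n : Nat) (ords : List Int) : List Int × List (List Int) :=
  (PySem.List.enumerate ords).foldl
    (fun st ic =>
      let i := ic.1
      let c := ic.2
      -- `indexes[ord(c) - 97]`: negative Python index wraps, cell (c-97) % 26 (exact on Pre_)
      let idxs := st.2.set (PySem.Int.mod (c - 97) 26).toNat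
          (pvBitAdd n (st.2.getD (PySem.Int.mod (c - 97) 26).toNat []) (i + 1).toNat 1)
      let down := if 0 < i ∧ c < PySem.List.pyGetD ords (i - 1) 0 then
          pvBitAdd n st.1 (i + 1).toNat 1 else st.1
      (down, idxs))
    (List.replicate (n + 1) 0, List.replicate 26 (List.replicate (n + 1) 0))

-- `for i in range(first+1, last): if indexes[i].queryRange(left,right) != indexes[i].queryRange(1,n): ok = False; break`
def pvOkA (n : Nat) (idxs : List (List Int)) (left right : Int) : List Int → Bool
  | [] => true
  | i :: rest =>
    -- `indexes[i]`: i ∈ (first, last) ⊆ [-26, 25]; Python's wrap makes this cell i % 26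
    if pvBitQueryRange n (idxs.getD (PySem.Int.mod i 26).toNat []) left right ≠
        pvBitQueryRange n (idxs.getD (PySem.Int.mod i 26).toNat []) 1 (n : Int) then false
    else pvOkA n idxs left right rest

-- the main `for i, (op, a, b) in enumerate(operations)` loop of A
def pvLoopA (n : Nat) (ops : List (Int × Int × Int)) (ords down : List Int)
    (idxs : List (List Int)) (res : List Bool) : List Bool :=
  match ops with
  | [] => res
  | (op, a, b) :: rest =>
    if op = 1 then
      let index := a - 1
      let st1 := pvAddA n ords down idxs index (PySem.List.pyGetD ords index 0) (-1)
      let ords' := ords.set index.toNat b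
      let st2 := pvAddA n ords' st1.1 st1.2 index b 1
      pvLoopA n rest ords' st2.1 st2.2 res
    else
      if pvBitQueryRange n down (a + 1) b ≠ 0 then
        pvLoopA n rest ords down idxs (res ++ [false])
      else
        let first := PySem.List.pyGetD ords (a - 1) 0 - 97
        let lastv := PySem.List.pyGetD ords (b - 1) 0 - 97
        pvLoopA n rest ords down idxs (res ++ [pvOkA n idxs a b (PySem.List.pyRange (first + 1) lastv)])

def subStringOfSortedString (s : String) (operations : List (Int × Int × Int)) : List Bool :=
  let n := s.toList.length
  let ords := s.toList.map (fun c => (c.toNat : Int))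
  let st := pvBuildA n ords
  pvLoopA n operations ords st.1 st.2 []

-- ===== PORT B =====

-- bisect.bisect_left on a sorted list (stdlib call, ported by its contract: #{y ∈ lst | y < x})
def pvBisL (lst : List Int) (x : Int) : Nat := lst.countP (fun y => decide (y < x))

-- bisect.bisect_right on a sorted list: #{y ∈ lst | y ≤ x}
def pvBisR (lst : List Int) (x : Int) : Nat := lst.countP (fun y => decide (y ≤ x))

-- B's `fix_down(i)`: recompute the descent marker at position i in the sorted list `downs`
def pvFixDown (n : Nat) (ords downs : List Int) (i : Int) : List Int :=
  let j := pvBisL downs i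
  let present := j < downs.length ∧ downs.getD j 0 = i
  if 0 < i ∧ i < (n : Int) ∧ PySem.List.pyGetD ords i 0 < PySem.List.pyGetD ords (i - 1) 0 then
    if ¬ present then downs.insertIdx j i else downs
  else if present then downs.eraseIdx j else downs

-- `for i, v in enumerate(ords): pos[v - 97].append(i)` — `pos[v-97]`: Python wraps a negative
-- list index, so the accessed cell is (v-97) % 26 (exact inside Pre_, where v ∈ [71, 122])
def pvBuildPos (ords : List Int) : List (List Int) :=
  (PySem.List.enumerate ords).foldl
    (fun pos iv =>
      let β := (PySem.Int.mod (iv.2 - 97) 26).toNat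
      pos.set β (pos.getD β [] ++ [iv.1]))
    (List.replicate 26 [])

-- `downs = [i for i in range(1, n) if ords[i] < ords[i-1]]`
def pvBuildDowns (ords : List Int) : List Int :=
  (PySem.List.pyRange 1 (ords.length : Int)).filter
    (fun i => decide (PySem.List.pyGetD ords i 0 < PySem.List.pyGetD ords (i - 1) 0))

-- B's query loop `for k in range(first+1, last): … break` over the per-letter position lists
def pvOkB (pos : List (List Int)) (left right : Int) : List Int → Bool
  | [] => true
  | k :: rest =>
    -- `pos[k]`: negative Python index wraps, cell k % 26 (exact inside Pre_)
    let lst := pos.getD (PySem.Int.mod k 26).toNat []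
    if ((pvBisR lst (right - 1) : Int) - (pvBisL lst (left - 1) : Int)) ≠ (lst.length : Int) then
      false
    else pvOkB pos left right rest

-- B's update of the per-letter position lists: remove position i from the old letter's
-- sorted list, insert it into the new letter's (`old.pop(bisect_left(old, i))` / `bisect.insort`)
def pvPosStep (pos : List (List Int)) (oldv b i : Int) : List (List Int) :=
  let βo := (PySem.Int.mod (oldv - 97) 26).toNat
  let old := pos.getD βo []
  let pos1 := pos.set βo (old.eraseIdx (pvBisL old i))
  let βn := (PySem.Int.mod (b - 97) 26).toNat
  let cur := pos1.getD βn []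
  pos1.set βn (cur.insertIdx (pvBisR cur i) i)

-- B's main loop over the operations
def pvLoopB (n : Nat) (ops : List (Int × Int × Int)) (ords downs : List Int)
    (pos : List (List Int)) (res : List Bool) : List Bool :=
  match ops with
  | [] => res
  | (op, a, b) :: rest =>
    if op = 1 then
      let i := a - 1
      let pos2 := pvPosStep pos (PySem.List.pyGetD ords i 0) b i
      let ords' := ords.set i.toNat b
      let downs1 := pvFixDown n ords' downs i
      let downs2 := pvFixDown n ords' downs1 (i + 1)
      pvLoopB n rest ords' downs2 pos2 res
    else
      if pvBisL downs a ≠ pvBisL downs b then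
        pvLoopB n rest ords downs pos (res ++ [false])
      else
        let first := PySem.List.pyGetD ords (a - 1) 0 - 97
        let lastv := PySem.List.pyGetD ords (b - 1) 0 - 97
        pvLoopB n rest ords downs pos
          (res ++ [pvOkB pos a b (PySem.List.pyRange (first + 1) lastv)])

def subStringOfSortedString_alt (s : String) (operations : List (Int × Int × Int)) : List Bool :=
  let n := s.toList.length
  let ords := s.toList.map (fun c => (c.toNat : Int))
  pvLoopB n operations ords (pvBuildDowns ords) (pvBuildPos ords) []

-- ===== PRECONDITION & SPEC =====
-- Pre_ is the domain A's table layout accepts: every character (and update codepoint) has code in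
-- [71, 122] (the codes whose cell ord-97 Python's 26-element list indexing accepts, wrapping the
-- negative ones), updates rewrite a valid 1-based position, and query endpoints stay inside the
-- range [1-n, n] that Python's (possibly negative) list indexing of ords accepts.  Outside it A
-- raises IndexError or loops forever in BITArray.add, except when a query with wilder endpoints is
-- short-circuited by a found descent (A returns False before touching ords): those stay excluded
-- (see cites).
def Pre_subStringOfSortedString (s : String) (operations : List (Int × Int × Int)) : Prop :=
  (s.toList.all (fun c => 71 ≤ c.toNat && c.toNat ≤ 122)) = true ∧
  (operations.all (fun o =>
    if o.1 = 1 then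
      decide (1 ≤ o.2.1) && decide (o.2.1 ≤ (s.toList.length : Int)) &&
        decide (71 ≤ o.2.2) && decide (o.2.2 ≤ 122)
    else
      decide (1 - (s.toList.length : Int) ≤ o.2.1) && decide (o.2.1 ≤ (s.toList.length : Int)) &&
        decide (1 - (s.toList.length : Int) ≤ o.2.2) && decide (o.2.2 ≤ (s.toList.length : Int)))) = true
instance (s : String) (operations : List (Int × Int × Int)) : Decidable (Pre_subStringOfSortedString s operations) := by
  unfold Pre_subStringOfSortedString; infer_instance

def pvWitness_subStringOfSortedString : String × (List (Int × Int × Int)) :=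
  ("ba", [(1, 2, 99), (2, 1, 2)])

def Spec_subStringOfSortedString (s : String) (operations : List (Int × Int × Int)) (out : List Bool) : Prop := out = subStringOfSortedString_alt s operations
instance (s : String) (operations : List (Int × Int × Int)) (out : List Bool) : Decidable (Spec_subStringOfSortedString s operations out) := by unfold Spec_subStringOfSortedString; infer_instance

-- ===== CLAIM (what is proved, stated in full; the proofs are below) =====
def Claim_equal_subStringOfSortedString : Prop := ∀ (s : String) (operations : List (Int × Int × Int)), Dom_subStringOfSortedString s operations → Pre_subStringOfSortedString s operations → Spec_subStringOfSortedString s operations (subStringOfSortedString s operations)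

-- ===== LEMMAS AND PROOFS =====

theorem pv_witness_pre :
    Dom_subStringOfSortedString pvWitness_subStringOfSortedString.1 pvWitness_subStringOfSortedString.2 ∧
    Pre_subStringOfSortedString pvWitness_subStringOfSortedString.1 pvWitness_subStringOfSortedString.2 := by
  decide

-- ---- lowbit arithmetic and the Fenwick tree vs prefix sums ----

def pvPrefS (vals : List Int) (r : Nat) : Int := (vals.take r).sum

def pvTreeOf (n : Nat) (vals : List Int) : List Int :=
  (List.range (n + 1)).map (fun j => if 1 ≤ j then pvPrefS vals j - pvPrefS vals (j - pvLb j) else 0)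

theorem pvLb_zero : pvLb 0 = 0 := by unfold pvLb; simp

theorem pvLb_odd (m : Nat) : pvLb (2 * m + 1) = 1 := by
  unfold pvLb; simp [Nat.mul_add_mod]

theorem pvLb_even (m : Nat) (hm : m ≠ 0) : pvLb (2 * m) = 2 * pvLb m := by
  conv_lhs => rw [pvLb]
  have h1 : ¬(2 * m = 0) := by omega
  have h2 : ¬(2 * m % 2 = 1) := by omega
  simp [h1, h2, Nat.mul_div_cancel_left m (by omega : 0 < 2)]

theorem pvLb_le (i : Nat) : pvLb i ≤ i := by
  induction i using Nat.strong_induction_on with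
  | _ i ih =>
    rcases Nat.eq_zero_or_pos i with h0 | h0
    · subst h0; simp [pvLb_zero]
    rcases Nat.even_or_odd i with ⟨m, hm⟩ | ⟨m, hm⟩
    · have hm' : i = 2 * m := by omega
      subst hm'
      have := ih m (by omega)
      rw [pvLb_even m (by omega)]; omega
    · subst hm; rw [pvLb_odd]; omega

theorem pv_even_add_lb (i : Nat) (h : 1 ≤ i) : (i + pvLb i) % 2 = 0 := by
  rcases Nat.even_or_odd i with ⟨m, hm⟩ | ⟨m, hm⟩
  · have hm' : i = 2 * m := by omega
    subst hm'; rw [pvLb_even m (by omega)]; omega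
  · subst hm; rw [pvLb_odd]; omega

theorem pv_lb_of_lt (c r : Nat) (hr : 0 < r) (hlt : r < pvLb c) : pvLb (c + r) = pvLb r := by
  induction c using Nat.strong_induction_on generalizing r with
  | _ c ih =>
    rcases Nat.eq_zero_or_pos c with h0 | h0
    · subst h0; rw [pvLb_zero] at hlt; omega
    rcases Nat.even_or_odd c with ⟨m, hm⟩ | ⟨m, hm⟩
    · have hm' : c = 2 * m := by omega
      subst hm'
      rw [pvLb_even m (by omega)] at hlt
      rcases Nat.even_or_odd r with ⟨t, ht⟩ | ⟨t, ht⟩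
      · have ht' : r = 2 * t := by omega
        subst ht'
        have h2 : 2 * m + 2 * t = 2 * (m + t) := by omega
        rw [h2, pvLb_even (m + t) (by omega), pvLb_even t (by omega),
          ih m (by omega) t (by omega) (by omega)]
      · subst ht
        have h2 : 2 * m + (2 * t + 1) = 2 * (m + t) + 1 := by omega
        rw [h2, pvLb_odd, pvLb_odd]
    · subst hm
      rw [pvLb_odd] at hlt; omega

theorem pv_cov_step (i j : Nat) (hi : 1 ≤ i) (hij : i + pvLb i ≤ j)
    (hcov : j - pvLb j < i + pvLb i) : j - pvLb j < i := by
  induction j using Nat.strong_induction_on generalizing i with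
  | _ j ih =>
    have hlbi := pvLb_pos i hi
    have hlbi' := pvLb_le i
    have hlbj' := pvLb_le j
    rcases Nat.even_or_odd j with ⟨b, hb⟩ | ⟨b, hb⟩
    · have hb' : j = 2 * b := by omega
      subst hb'
      have hlbj : pvLb (2 * b) = 2 * pvLb b := pvLb_even b (by omega)
      rcases Nat.even_or_odd i with ⟨a, ha⟩ | ⟨a, ha⟩
      · have ha' : i = 2 * a := by omega
        subst ha'
        have hlbi2 : pvLb (2 * a) = 2 * pvLb a := pvLb_even a (by omega)
        have hlbb := pvLb_le b
        have hlba := pvLb_le a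
        have key : b - pvLb b < a :=
          ih b (by omega) a (by omega) (by omega) (by omega)
        omega
      · subst ha
        rw [pvLb_odd] at hij hcov
        have hlbb := pvLb_le b
        omega
    · subst hb
      rw [pvLb_odd] at hcov ⊢
      have heven := pv_even_add_lb i hi
      omega

theorem pv_cov_iff (i j : Nat) (hi : 1 ≤ i) :
    (i ≤ j ∧ j - pvLb j < i) ↔ (j = i ∨ (i + pvLb i ≤ j ∧ j - pvLb j < i + pvLb i)) := by
  constructor
  · rintro ⟨h1, h2⟩
    rcases Nat.eq_or_lt_of_le h1 with h | h
    · exact Or.inl h.symm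
    refine Or.inr ⟨?_, by have := pvLb_pos i hi; omega⟩
    by_contra hcon
    have hr : 0 < j - i ∧ j - i < pvLb i := by omega
    have := pv_lb_of_lt i (j - i) hr.1 hr.2
    have h3 : i + (j - i) = j := by omega
    rw [h3] at this
    have := pvLb_le (j - i)
    omega
  · rintro (rfl | ⟨h1, h2⟩)
    · have := pvLb_pos j hi
      have := pvLb_le j
      omega
    · have := pvLb_pos i hi
      exact ⟨by omega, pv_cov_step i j hi h1 h2⟩

-- Fenwick layer

theorem pvTreeOf_length (n : Nat) (vals : List Int) : (pvTreeOf n vals).length = n + 1 := by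
  simp [pvTreeOf]

theorem pvTreeOf_getD (n : Nat) (vals : List Int) (j : Nat) :
    (pvTreeOf n vals).getD j 0 =
      if 1 ≤ j ∧ j ≤ n then pvPrefS vals j - pvPrefS vals (j - pvLb j) else 0 := by
  by_cases h : j ≤ n
  · rw [pvTreeOf, List.getD_eq_getElem?_getD, List.getElem?_map, List.getElem?_range (by omega : j < n + 1)]
    simp only [Option.map_some, Option.getD_some]
    by_cases h1 : 1 ≤ j <;> simp [h1, h]
  · rw [pvTreeOf, List.getD_eq_getElem?_getD, List.getElem?_map]
    rw [List.getElem?_eq_none (by simp; omega)]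
    simp; omega

theorem pvBitAdd_length (n : Nat) (tree : List Int) (idx : Nat) (delta : Int) :
    (pvBitAdd n tree idx delta).length = tree.length := by
  fun_induction pvBitAdd with
  | case1 tree idx h ih => rw [ih]; simp
  | case2 => rfl

theorem pv_getD_set (l : List Int) (i j : Nat) (x : Int) (hi : i < l.length) :
    (l.set i x).getD j 0 = if j = i then x else l.getD j 0 := by
  by_cases hj : j = i
  · subst hj; simp [List.getD_eq_getElem?_getD, List.getElem?_set_self (by omega), hi]
  · simp [List.getD_eq_getElem?_getD, List.getElem?_set_ne (by omega : i ≠ j), hj]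

theorem pvBitAdd_getD (n : Nat) (tree : List Int) (idx : Nat) (delta : Int)
    (hlen : tree.length = n + 1) (hidx : 1 ≤ idx) (j : Nat) :
    (pvBitAdd n tree idx delta).getD j 0 =
      tree.getD j 0 + (if idx ≤ j ∧ j - pvLb j < idx ∧ j ≤ n then delta else 0) := by
  fun_induction pvBitAdd generalizing j with
  | case1 tree idx h ih =>
    have hlb := pvLb_pos idx h.1
    rw [ih (by simpa using hlen) (by omega)]
    rw [pv_getD_set _ _ _ _ (by omega)]
    have hiff := pv_cov_iff idx j h.1
    by_cases hj : j = idx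
    · rw [if_pos hj, hj]
      rw [if_neg (show ¬(idx + pvLb idx ≤ idx ∧ idx - pvLb idx < idx + pvLb idx ∧ idx ≤ n) by omega)]
      rw [if_pos (⟨le_refl idx, by omega, h.2⟩ : idx ≤ idx ∧ idx - pvLb idx < idx ∧ idx ≤ n)]
      ring
    · rw [if_neg hj]
      by_cases hc : idx + pvLb idx ≤ j ∧ j - pvLb j < idx + pvLb idx ∧ j ≤ n
      · have hcv := hiff.mpr (Or.inr ⟨hc.1, hc.2.1⟩)
        rw [if_pos hc, if_pos ⟨hcv.1, hcv.2, hc.2.2⟩]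
      · rw [if_neg hc, if_neg (by
          rintro ⟨g1, g2, g3⟩
          rcases hiff.mp ⟨g1, g2⟩ with h' | h'
          · exact hj h'
          · exact hc ⟨h'.1, h'.2, g3⟩)]
  | case2 tree idx h =>
    rw [if_neg (by omega)]
    ring

theorem pvPrefS_set (vals : List Int) (k : Nat) (x : Int) (r : Nat) :
    pvPrefS (vals.set k x) r =
      pvPrefS vals r + (if k < r ∧ k < vals.length then x - vals.getD k 0 else 0) := by
  induction vals generalizing k r with
  | nil => simp [pvPrefS]
  | cons v vs ih =>
    cases k with
    | zero =>
      cases r with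
      | zero => simp [pvPrefS]
      | succ r => simp [pvPrefS, List.set, List.getD]; ring
    | succ k =>
      cases r with
      | zero => simp [pvPrefS]
      | succ r =>
        have := ih k r
        simp only [pvPrefS, List.set, List.take, List.sum_cons, List.getD_cons_succ] at *
        rw [this]
        by_cases hc : k < r ∧ k < vs.length <;> simp [hc] <;> omega

theorem pvBitQueryAux_treeOf (n : Nat) (vals : List Int) (r : Nat) (hr : r ≤ n) :
    pvBitQueryAux (pvTreeOf n vals) r = pvPrefS vals r := by
  induction r using Nat.strong_induction_on with
  | _ r ih =>
    unfold pvBitQueryAux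
    by_cases h0 : r = 0
    · simp [h0, pvPrefS]
    · have hlb := pvLb_pos r (by omega)
      have hlb' := pvLb_le r
      rw [dif_neg h0, pvTreeOf_getD, if_pos ⟨by omega, hr⟩, ih (r - pvLb r) (by omega) (by omega)]
      ring

theorem pvBitQuery_treeOf (n : Nat) (vals : List Int) (x : Int) :
    pvBitQuery n (pvTreeOf n vals) x = pvPrefS vals (min x (n : Int)).toNat := by
  unfold pvBitQuery
  exact pvBitQueryAux_treeOf n vals _ (by omega)

theorem pvBitAdd_treeOf (n : Nat) (vals : List Int) (idx : Nat) (delta : Int)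
    (hlen : vals.length = n) (h1 : 1 ≤ idx) (h2 : idx ≤ n) :
    pvBitAdd n (pvTreeOf n vals) idx delta =
      pvTreeOf n (vals.set (idx - 1) (vals.getD (idx - 1) 0 + delta)) := by
  have hlenL : (pvBitAdd n (pvTreeOf n vals) idx delta).length = n + 1 := by
    rw [pvBitAdd_length, pvTreeOf_length]
  apply List.ext_getElem (by rw [hlenL, pvTreeOf_length])
  intro j hjl hjr
  have hget : ∀ (l : List Int) (hj : j < l.length), l[j] = l.getD j 0 := by
    intro l hj; rw [List.getD_eq_getElem?_getD, List.getElem?_eq_getElem hj]; rfl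
  rw [hget _ hjl, hget _ hjr]
  rw [pvBitAdd_getD n _ idx delta (pvTreeOf_length n vals) h1 j, pvTreeOf_getD, pvTreeOf_getD,
    pvPrefS_set, pvPrefS_set]
  have hlbj' := pvLb_le j
  have hlbj : 1 ≤ j → 1 ≤ pvLb j := pvLb_pos j
  split_ifs
  all_goals (try ring)
  all_goals (exfalso; omega)

-- ---- indicator value lists ----

def pvDvP (ords : List Int) (p : Nat) : Bool :=
  decide (1 ≤ p) && decide (ords.getD p 0 < ords.getD (p - 1) 0)

def pvDv (ords : List Int) : List Int :=
  (List.range ords.length).map (fun p => if pvDvP ords p then 1 else 0)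

def pvCvP (c v : Int) : Bool := decide (PySem.Int.mod (v - 97) 26 = c)

def pvCv (ords : List Int) (c : Int) : List Int :=
  ords.map (fun v => if pvCvP c v then 1 else 0)

def pvGood (n : Nat) (ords down : List Int) (idxs : List (List Int)) : Prop :=
  ords.length = n ∧ (∀ v ∈ ords, 71 ≤ v ∧ v ≤ 122) ∧
  down = pvTreeOf n (pvDv ords) ∧
  idxs = (List.range 26).map (fun b : Nat => pvTreeOf n (pvCv ords ((b : Int))))

-- ---- generic list helpers ----

theorem pv_set_zero_eq (vals : List Int) (k : Nat) (h : vals.getD k 0 = 0) :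
    vals.set k 0 = vals := by
  apply List.ext_getElem (by simp)
  intro j hj hj2
  rw [List.getElem_set]
  split
  · rename_i hkj
    subst hkj
    rw [List.getD_eq_getElem?_getD, List.getElem?_eq_getElem hj2] at h
    simpa using h.symm
  · rfl

theorem pv_map_range_set {β : Type} (m : Nat) (f : Nat → β) (i : Nat) (x : β) (hi : i < m) :
    ((List.range m).map f).set i x = (List.range m).map (fun j => if j = i then x else f j) := by
  apply List.ext_getElem (by simp)
  intro j hj hj2
  simp only [List.getElem_set, List.getElem_map, List.getElem_range]
  simp only [List.length_set, List.length_map, List.length_range] at hj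
  by_cases hij : j = i
  · simp [hij]
  · simp [hij, Ne.symm hij]

-- ---- truncated value lists for the build loop ----

def pvTrunc (n k : Nat) (vals : List Int) : List Int :=
  (List.range n).map (fun p => if p < k then vals.getD p 0 else 0)

theorem pvTrunc_length (n k : Nat) (vals : List Int) : (pvTrunc n k vals).length = n := by
  simp [pvTrunc]

theorem pvTrunc_getD (n k : Nat) (vals : List Int) (p : Nat) :
    (pvTrunc n k vals).getD p 0 = if p < k ∧ p < n then vals.getD p 0 else 0 := by
  by_cases hp : p < n
  · rw [pvTrunc, PySem.List.getD_map_range _ _ _ _ hp]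
    by_cases hk : p < k <;> simp [hk, hp]
  · rw [List.getD_eq_getElem?_getD, List.getElem?_eq_none (by simp [pvTrunc]; omega)]
    simp; omega

theorem pvTrunc_succ (n k : Nat) (vals : List Int) (hk : k < n) :
    pvTrunc n (k + 1) vals = (pvTrunc n k vals).set k (vals.getD k 0) := by
  rw [pvTrunc, pvTrunc, pv_map_range_set n _ k _ hk]
  apply List.map_congr_left
  intro j hj
  rw [List.mem_range] at hj
  by_cases hjk : j = k
  · subst hjk; simp
  · have : (j < k + 1) ↔ (j < k) := by omega
    simp [hjk, this]

theorem pvTrunc_zero (n : Nat) (vals : List Int) : pvTrunc n 0 vals = List.replicate n 0 := by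
  apply List.eq_replicate_iff.mpr
  refine ⟨by simp [pvTrunc], ?_⟩
  intro b hb
  rcases List.mem_map.mp hb with ⟨a, _, rfl⟩
  simp

theorem pvTrunc_full (n : Nat) (vals : List Int) (h : vals.length = n) : pvTrunc n n vals = vals := by
  apply List.ext_getElem (by simp [pvTrunc, h])
  intro j hj hj2
  have hjn : j < n := by simpa [pvTrunc] using hj
  rw [show (pvTrunc n n vals)[j] = (pvTrunc n n vals).getD j 0 from by
    rw [List.getD_eq_getElem?_getD, List.getElem?_eq_getElem hj]; rfl]
  rw [pvTrunc_getD, if_pos ⟨hjn, hjn⟩, List.getD_eq_getElem?_getD, List.getElem?_eq_getElem hj2]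
  rfl

theorem pvTreeOf_zero (n : Nat) : pvTreeOf n (List.replicate n 0) = List.replicate (n + 1) 0 := by
  have hpre : ∀ r, pvPrefS (List.replicate n (0 : Int)) r = 0 := by
    intro r; simp [pvPrefS, List.take_replicate]
  apply List.ext_getElem (by simp [pvTreeOf])
  intro j hj hj2
  simp only [pvTreeOf, List.getElem_map, List.getElem_range, List.getElem_replicate, hpre]
  split <;> simp

theorem pv_dv_length (ords : List Int) : (pvDv ords).length = ords.length := by simp [pvDv]

theorem pv_cv_length (ords : List Int) (c : Int) : (pvCv ords c).length = ords.length := by simp [pvCv]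

theorem pv_dv_getD (ords : List Int) (k : Nat) (hk : k < ords.length) :
    (pvDv ords).getD k 0 = if pvDvP ords k then 1 else 0 := by
  rw [pvDv, PySem.List.getD_map_range _ _ _ _ hk]

theorem pv_cv_getD (ords : List Int) (c : Int) (k : Nat) (hk : k < ords.length) :
    (pvCv ords c).getD k 0 = if PySem.Int.mod (ords.getD k 0 - 97) 26 = c then 1 else 0 := by
  rw [pvCv, List.getD_eq_getElem?_getD, List.getElem?_map, List.getElem?_eq_getElem hk]
  simp only [Option.map_some, Option.getD_some, pvCvP]
  rw [List.getD_eq_getElem?_getD, List.getElem?_eq_getElem hk]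
  by_cases h : PySem.Int.mod (ords[k] - 97) 26 = c <;> simp [h]

theorem pv_enum_cons {α : Type} (x : α) (xs : List α) (k : Int) :
    PySem.List.enumerate (x :: xs) k = (k, x) :: PySem.List.enumerate xs (k + 1) := by
  simp [PySem.List.enumerate]

theorem pvBuild_go (n : Nat) (full : List Int) (hlen : full.length = n)
    (hv : ∀ v ∈ full, 71 ≤ v ∧ v ≤ 122) :
    ∀ (suf : List Int) (k : Nat), suf = full.drop k → k ≤ n →
    (PySem.List.enumerate suf (k : Int)).foldl
      (fun st ic =>
        let i := ic.1
        let c := ic.2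
        let idxs := st.2.set (PySem.Int.mod (c - 97) 26).toNat
            (pvBitAdd n (st.2.getD (PySem.Int.mod (c - 97) 26).toNat []) (i + 1).toNat 1)
        let down := if 0 < i ∧ c < PySem.List.pyGetD full (i - 1) 0 then
            pvBitAdd n st.1 (i + 1).toNat 1 else st.1
        (down, idxs))
      (pvTreeOf n (pvTrunc n k (pvDv full)),
       (List.range 26).map (fun b : Nat => pvTreeOf n (pvTrunc n k (pvCv full ((b : Int))))))
      = (pvTreeOf n (pvDv full),
         (List.range 26).map (fun b : Nat => pvTreeOf n (pvCv full ((b : Int))))) := by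
  intro suf
  induction suf with
  | nil =>
    intro k hk hkn
    have hkeq : k = n := by
      have := congrArg List.length hk
      simp [List.length_drop, hlen] at this
      omega
    subst hkeq
    simp only [PySem.List.enumerate, List.foldl_nil]
    rw [pvTrunc_full _ _ (by rw [pv_dv_length, hlen])]
    congr 1
    apply List.map_congr_left
    intro b _
    rw [pvTrunc_full _ _ (by rw [pv_cv_length, hlen])]
  | cons c rest ih =>
    intro k hdrop hkn
    have hklen : k < n := by
      have := congrArg List.length hdrop
      simp [List.length_drop, hlen] at this
      omega
    have hvc : 71 ≤ c ∧ c ≤ 122 := hv c (List.mem_of_mem_drop (hdrop ▸ List.mem_cons_self))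
    have hc : full.getD k 0 = c := by
      have h0 : (full.drop k)[0]? = some c := by rw [← hdrop]; rfl
      rw [List.getElem?_drop, Nat.add_zero] at h0
      rw [List.getD_eq_getElem?_getD, h0]
      rfl
    have hrest : rest = full.drop (k + 1) := by
      rw [← List.tail_drop, ← hdrop]; rfl
    rw [pv_enum_cons, List.foldl_cons]
    have htonat : ((k : Int) + 1).toNat = k + 1 := by omega
    -- the letter bucket index (Python-wrapped)
    set β := (PySem.Int.mod (c - 97) 26).toNat with hβdef
    have hm0 : 0 ≤ PySem.Int.mod (c - 97) 26 := PySem.Int.mod_nonneg _ (by norm_num)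
    have hm1 : PySem.Int.mod (c - 97) 26 < 26 := PySem.Int.mod_lt _ (by norm_num)
    have hβ : β < 26 := by omega
    have hβc : PySem.Int.mod (c - 97) 26 = (β : Int) := by omega
    -- idxs component
    have hidx :
        (((List.range 26).map (fun b : Nat => pvTreeOf n (pvTrunc n k (pvCv full ((b : Int)))))).set β
            (pvBitAdd n
              (((List.range 26).map (fun b : Nat => pvTreeOf n (pvTrunc n k (pvCv full ((b : Int)))))).getD β [])
              ((k : Int) + 1).toNat 1))
          = (List.range 26).map (fun b : Nat => pvTreeOf n (pvTrunc n (k + 1) (pvCv full ((b : Int))))) := by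
      rw [PySem.List.getD_map_range _ _ _ _ hβ, htonat]
      rw [pvBitAdd_treeOf n _ (k + 1) 1 (pvTrunc_length n k _) (by omega) (by omega)]
      have hset : (pvTrunc n k (pvCv full ((β : Int)))).set k
            ((pvTrunc n k (pvCv full ((β : Int)))).getD k 0 + 1)
          = pvTrunc n (k + 1) (pvCv full ((β : Int))) := by
        rw [pvTrunc_getD, if_neg (by omega)]
        norm_num
        rw [pvTrunc_succ _ _ _ hklen, pv_cv_getD _ _ _ (by omega), hc, if_pos hβc]
      rw [show k + 1 - 1 = k from by omega, hset, pv_map_range_set _ _ _ _ hβ]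
      apply List.map_congr_left
      intro b hb
      rw [List.mem_range] at hb
      by_cases hbβ : b = β
      · simp [hbβ]
      · rw [if_neg hbβ]
        congr 1
        rw [pvTrunc_succ _ _ _ hklen, pv_cv_getD _ _ _ (by omega), hc,
          if_neg (by intro h; apply hbβ; omega), pv_set_zero_eq _ _ (by rw [pvTrunc_getD]; omega)]
    -- down component
    have hdown :
        (if 0 < (k : Int) ∧ c < PySem.List.pyGetD full ((k : Int) - 1) 0 then
            pvBitAdd n (pvTreeOf n (pvTrunc n k (pvDv full))) ((k : Int) + 1).toNat 1
         else pvTreeOf n (pvTrunc n k (pvDv full)))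
          = pvTreeOf n (pvTrunc n (k + 1) (pvDv full)) := by
      have hcond : (0 < (k : Int) ∧ c < PySem.List.pyGetD full ((k : Int) - 1) 0) ↔ pvDvP full k = true := by
        rw [pvDvP, Bool.and_eq_true, decide_eq_true_iff, decide_eq_true_iff]
        constructor
        · rintro ⟨h1, h2⟩
          have hk1 : ((k : Int) - 1) = ((k - 1 : Nat) : Int) := by omega
          rw [hk1, PySem.List.pyGetD_natCast] at h2
          exact ⟨by omega, by rw [hc]; exact h2⟩
        · rintro ⟨h1, h2⟩
          have hk1 : ((k : Int) - 1) = ((k - 1 : Nat) : Int) := by omega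
          rw [hk1, PySem.List.pyGetD_natCast]
          rw [hc] at h2
          exact ⟨by omega, h2⟩
      rw [pvTrunc_succ _ _ _ hklen, pv_dv_getD _ _ (by omega)]
      by_cases hcd : pvDvP full k = true
      · rw [if_pos (hcond.mpr hcd), if_pos hcd, htonat]
        rw [pvBitAdd_treeOf n _ (k + 1) 1 (pvTrunc_length n k _) (by omega) (by omega)]
        rw [show k + 1 - 1 = k from by omega, pvTrunc_getD, if_neg (by omega)]
        norm_num
      · rw [if_neg (fun h => hcd (hcond.mp h)), if_neg hcd,
          pv_set_zero_eq _ _ (by rw [pvTrunc_getD]; omega)]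
    have hcast : (((k + 1 : Nat) : Int)) = (k : Int) + 1 := by push_cast; ring
    have ih' := ih (k + 1) hrest (by omega)
    rw [hcast] at ih'
    refine Eq.trans ?_ ih'
    congr 1
    dsimp only
    rw [hidx, hdown]

theorem pvBuildA_good (n : Nat) (ords : List Int) (hlen : ords.length = n)
    (hv : ∀ v ∈ ords, 71 ≤ v ∧ v ≤ 122) :
    pvGood n ords (pvBuildA n ords).1 (pvBuildA n ords).2 := by
  have h0 := pvBuild_go n ords hlen hv ords 0 (by simp) (by omega)
  rw [pvTrunc_zero, pvTreeOf_zero] at h0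
  have hcv0 : ((List.range 26).map (fun b : Nat => pvTreeOf n (pvTrunc n 0 (pvCv ords ((b : Int))))))
      = List.replicate 26 (List.replicate (n + 1) 0) := by
    apply List.eq_replicate_iff.mpr
    refine ⟨by simp, ?_⟩
    intro x hx
    rcases List.mem_map.mp hx with ⟨b, _, rfl⟩
    rw [pvTrunc_zero, pvTreeOf_zero]
  rw [hcv0] at h0
  have : pvBuildA n ords = (pvTreeOf n (pvDv ords),
      (List.range 26).map (fun b : Nat => pvTreeOf n (pvCv ords ((b : Int))))) := by
    rw [pvBuildA, show ((0 : Int)) = ((0 : Nat) : Int) from rfl] at *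
    exact h0
  rw [pvGood, this]
  exact ⟨hlen, hv, rfl, rfl⟩

-- ---- helpers for the point-update lemma ----

theorem pv_set_getD_eq (vals : List Int) (k : Nat) : vals.set k (vals.getD k 0) = vals := by
  by_cases hk : k < vals.length
  · apply List.ext_getElem (by simp)
    intro j hj hj2
    rw [List.getElem_set]
    split
    · rename_i hkj
      subst hkj
      rw [List.getD_eq_getElem?_getD, List.getElem?_eq_getElem hj2]
      rfl
    · rfl
  · rw [List.set_eq_of_length_le (by omega)]

theorem pv_getD_set_ne (vals : List Int) (k j : Nat) (x : Int) (h : k ≠ j) :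
    (vals.set k x).getD j 0 = vals.getD j 0 := by
  rw [List.getD_eq_getElem?_getD, List.getElem?_set_ne h, ← List.getD_eq_getElem?_getD]

theorem pv_cond_add (n : Nat) (vals : List Int) (hlen : vals.length = n) (p : Nat)
    (delta x : Int) (C : Prop) [Decidable C]
    (hC : C → p < n ∧ vals.getD p 0 + delta = x) (hnC : ¬C → vals.getD p 0 = x) :
    (if C then pvBitAdd n (pvTreeOf n vals) (p + 1) delta else pvTreeOf n vals) =
      pvTreeOf n (vals.set p x) := by
  by_cases h : C
  · obtain ⟨h1, h2⟩ := hC h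
    rw [if_pos h, pvBitAdd_treeOf n vals (p + 1) delta hlen (by omega) (by omega),
      Nat.add_sub_cancel, h2]
  · rw [if_neg h, ← hnC h, pv_set_getD_eq]

theorem pv_dv_getD_big (ords : List Int) (k : Nat) (hk : ords.length ≤ k) :
    (pvDv ords).getD k 0 = 0 := by
  rw [List.getD_eq_getElem?_getD, List.getElem?_eq_none (by simp [pvDv]; omega)]
  rfl

theorem pv_dv_update (ords : List Int) (idx : Nat) (b : Int) (hidx : idx < ords.length) :
    ((((pvDv ords).set idx 0).set (idx + 1) 0).set idx ((pvDv (ords.set idx b)).getD idx 0)).set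
        (idx + 1) ((pvDv (ords.set idx b)).getD (idx + 1) 0) = pvDv (ords.set idx b) := by
  apply List.ext_getElem (by simp [pvDv])
  intro j hj hj2
  have hjlen : j < ords.length := by simpa [pvDv] using hj2
  have hgetj : ∀ (l : List Int) (h : j < l.length), l[j] = l.getD j 0 := by
    intro l h; rw [List.getD_eq_getElem?_getD, List.getElem?_eq_getElem h]; rfl
  rw [hgetj _ hj, hgetj _ hj2]
  by_cases hj1 : j = idx + 1
  · subst hj1
    rw [List.getD_eq_getElem?_getD, List.getElem?_set_self (by simpa [pvDv] using hjlen)]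
    rfl
  · rw [pv_getD_set_ne _ _ _ _ (by omega)]
    by_cases hj0 : j = idx
    · subst hj0
      rw [List.getD_eq_getElem?_getD, List.getElem?_set_self (by simpa [pvDv] using hjlen)]
      rfl
    · rw [pv_getD_set_ne _ _ _ _ (by omega), pv_getD_set_ne _ _ _ _ (by omega),
        pv_getD_set_ne _ _ _ _ (by omega)]
      rw [pv_dv_getD _ _ hjlen, pv_dv_getD _ _ (by simpa using hjlen)]
      have e1 : (ords.set idx b).getD j 0 = ords.getD j 0 := pv_getD_set_ne _ _ _ _ (by omega)
      have e2 : (ords.set idx b).getD (j - 1) 0 = ords.getD (j - 1) 0 := by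
        by_cases hj01 : j = 0
        · subst hj01
          exact pv_getD_set_ne _ _ _ _ (by omega)
        · exact pv_getD_set_ne _ _ _ _ (by omega)
      rw [pvDvP, pvDvP, e1, e2]

theorem pv_cv_set (ords : List Int) (c x : Int) (idx : Nat) (hidx : idx < ords.length) :
    (pvCv ords c).set idx (if PySem.Int.mod (x - 97) 26 = c then 1 else 0) =
      pvCv (ords.set idx x) c := by
  apply List.ext_getElem (by simp [pvCv])
  intro j hj hj2
  have hjlen : j < ords.length := by simpa [pvCv] using hj2
  by_cases hj0 : j = idx
  · subst hj0
    rw [List.getElem_set_self (by simpa [pvCv] using hjlen)]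
    simp only [pvCv, List.getElem_map, List.getElem_set_self (by simpa using hidx), pvCvP]
    by_cases h : PySem.Int.mod (x - 97) 26 = c <;> simp [h]
  · rw [List.getElem_set_ne (by omega)]
    simp only [pvCv, List.getElem_map, pvCvP]
    rw [List.getElem_set_ne (by omega)]

theorem pvUpdate_good (n : Nat) (ords down : List Int) (idxs : List (List Int))
    (a b : Int) (hg : pvGood n ords down idxs)
    (ha : 1 ≤ a ∧ a ≤ (n : Int)) (hb : 71 ≤ b ∧ b ≤ 122) :
    pvGood n (ords.set (a - 1).toNat b)
      (pvAddA n (ords.set (a - 1).toNat b)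
        (pvAddA n ords down idxs (a - 1) (PySem.List.pyGetD ords (a - 1) 0) (-1)).1
        (pvAddA n ords down idxs (a - 1) (PySem.List.pyGetD ords (a - 1) 0) (-1)).2
        (a - 1) b 1).1
      (pvAddA n (ords.set (a - 1).toNat b)
        (pvAddA n ords down idxs (a - 1) (PySem.List.pyGetD ords (a - 1) 0) (-1)).1
        (pvAddA n ords down idxs (a - 1) (PySem.List.pyGetD ords (a - 1) 0) (-1)).2
        (a - 1) b 1).2 := by
  obtain ⟨hlen, hvv, hdown, hidxs⟩ := hg
  subst hdown hidxs
  set idx := (a - 1).toNat with hidxdef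
  have hidxn : idx < n := by omega
  have hcast : (a - 1) = ((idx : Nat) : Int) := by omega
  have ho : PySem.List.pyGetD ords (a - 1) 0 = ords.getD idx 0 := by
    rw [hcast, PySem.List.pyGetD_natCast]
  have homem : ords.getD idx 0 ∈ ords := by
    rw [List.getD_eq_getElem?_getD, List.getElem?_eq_getElem (by omega)]
    exact List.getElem_mem _
  have hob := hvv _ homem
  set o := ords.getD idx 0 with hodef
  set βo := (PySem.Int.mod (o - 97) 26).toNat with hβodef
  have hmo0 : 0 ≤ PySem.Int.mod (o - 97) 26 := PySem.Int.mod_nonneg _ (by norm_num)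
  have hmo1 : PySem.Int.mod (o - 97) 26 < 26 := PySem.Int.mod_lt _ (by norm_num)
  have hβo : βo < 26 := by omega
  have hβoc : PySem.Int.mod (o - 97) 26 = (βo : Int) := by omega
  set βb := (PySem.Int.mod (b - 97) 26).toNat with hβbdef
  have hmb0 : 0 ≤ PySem.Int.mod (b - 97) 26 := PySem.Int.mod_nonneg _ (by norm_num)
  have hmb1 : PySem.Int.mod (b - 97) 26 < 26 := PySem.Int.mod_lt _ (by norm_num)
  have hβb : βb < 26 := by omega
  have hβbc : PySem.Int.mod (b - 97) 26 = (βb : Int) := by omega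
  have hdvlen : (pvDv ords).length = n := by rw [pv_dv_length, hlen]
  have htn1 : (a - 1 + 1).toNat = idx + 1 := by omega
  have hdvidx1 : ∀ C : Prop, (C → 0 < a - 1 ∧ PySem.List.pyGetD ords (a - 1 - 1) 0 > o) →
      ((C → idx < n ∧ (pvDv ords).getD idx 0 + (-1) = 0)) := by
    intro C hC hc
    obtain ⟨h1, h2⟩ := hC hc
    have hk1 : (a - 1 - 1) = ((idx - 1 : Nat) : Int) := by omega
    rw [hk1, PySem.List.pyGetD_natCast] at h2
    refine ⟨hidxn, ?_⟩
    rw [pv_dv_getD _ _ (by omega), if_pos (by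
      rw [pvDvP, Bool.and_eq_true, decide_eq_true_iff, decide_eq_true_iff]
      exact ⟨by omega, by rw [← hodef]; omega⟩)]
    norm_num
  -- first add (removal of the old letter)
  have hA1 : pvAddA n ords (pvTreeOf n (pvDv ords))
      ((List.range 26).map (fun b' : Nat => pvTreeOf n (pvCv ords ((b' : Int)))))
      (a - 1) (PySem.List.pyGetD ords (a - 1) 0) (-1)
      = (pvTreeOf n (((pvDv ords).set idx 0).set (idx + 1) 0),
         (List.range 26).map (fun b' : Nat =>
           if b' = βo then pvTreeOf n ((pvCv ords ((βo : Int))).set idx 0)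
           else pvTreeOf n (pvCv ords ((b' : Int))))) := by
    unfold pvAddA
    dsimp only
    rw [ho, ← hβodef]
    congr 1
    -- the down component
    · rw [htn1]
      rw [pv_cond_add n (pvDv ords) hdvlen idx (-1) 0 _
        (hdvidx1 _ (fun hc => hc))
        (by
          intro hc
          rw [pv_dv_getD _ _ (by omega), if_neg (by
            rw [pvDvP, Bool.and_eq_true, decide_eq_true_iff, decide_eq_true_iff]
            rintro ⟨g1, g2⟩
            apply hc
            have hk1 : (a - 1 - 1) = ((idx - 1 : Nat) : Int) := by omega
            rw [hk1, PySem.List.pyGetD_natCast]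
            exact ⟨by omega, by rw [← hodef] at g2; omega⟩)])]
      rw [show ((a - 1 + 1) + 1).toNat = (idx + 1) + 1 from by omega]
      rw [pv_cond_add n _ (by rw [List.length_set, hdvlen]) (idx + 1) (-1) 0 _
        (by
          rintro ⟨g1, g2⟩
          have hk1 : (a - 1 + 1) = ((idx + 1 : Nat) : Int) := by omega
          rw [hk1, PySem.List.pyGetD_natCast] at g2
          refine ⟨by omega, ?_⟩
          rw [pv_getD_set_ne _ _ _ _ (by omega), pv_dv_getD _ _ (by omega), if_pos (by
            rw [pvDvP, Bool.and_eq_true, decide_eq_true_iff, decide_eq_true_iff]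
            exact ⟨by omega, by rw [Nat.add_sub_cancel]; omega⟩)]
          norm_num)
        (by
          intro hc
          rw [pv_getD_set_ne _ _ _ _ (by omega)]
          by_cases hbig : idx + 1 < n
          · rw [pv_dv_getD _ _ (by omega), if_neg (by
              rw [pvDvP, Bool.and_eq_true, decide_eq_true_iff, decide_eq_true_iff]
              rintro ⟨g1, g2⟩
              apply hc
              have hk1 : (a - 1 + 1) = ((idx + 1 : Nat) : Int) := by omega
              rw [hk1, PySem.List.pyGetD_natCast]
              rw [Nat.add_sub_cancel] at g2
              exact ⟨by omega, by omega⟩)]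
          · exact pv_dv_getD_big _ _ (by omega))]
    -- the letter-bucket component
    · rw [PySem.List.getD_map_range _ _ _ _ hβo, htn1]
      rw [pvBitAdd_treeOf n _ (idx + 1) (-1) (by rw [pv_cv_length, hlen]) (by omega) (by omega),
        Nat.add_sub_cancel, pv_cv_getD _ _ _ (by omega), ← hodef, if_pos hβoc]
      rw [pv_map_range_set _ _ _ _ hβo]
      norm_num
  rw [hA1]
  -- second add (insertion of the new letter), on the updated ords
  set ords' := ords.set idx b with hords'def
  have hlen' : ords'.length = n := by rw [hords'def, List.length_set, hlen]
  have hdv1len : ((((pvDv ords).set idx 0).set (idx + 1) 0)).length = n := by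
    rw [List.length_set, List.length_set, hdvlen]
  have hgetd1 : (((pvDv ords).set idx 0).set (idx + 1) 0).getD idx 0 = 0 := by
    rw [pv_getD_set_ne _ _ _ _ (by omega), List.getD_eq_getElem?_getD,
      List.getElem?_set_self (by omega)]
    rfl
  have hgb : ords'.getD idx 0 = b := by
    rw [hords'def, List.getD_eq_getElem?_getD, List.getElem?_set_self (by omega), Option.getD_some]
  have hA2 : pvAddA n ords' (pvTreeOf n (((pvDv ords).set idx 0).set (idx + 1) 0))
      ((List.range 26).map (fun b' : Nat =>
        if b' = βo then pvTreeOf n ((pvCv ords ((βo : Int))).set idx 0)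
        else pvTreeOf n (pvCv ords ((b' : Int)))))
      (a - 1) b 1
      = (pvTreeOf n (pvDv ords'),
         (List.range 26).map (fun b' : Nat => pvTreeOf n (pvCv ords' ((b' : Int))))) := by
    unfold pvAddA
    dsimp only
    congr 1
    -- down
    · rw [htn1]
      rw [pv_cond_add n _ hdv1len idx 1 ((pvDv ords').getD idx 0) _
        (by
          rintro ⟨g1, g2⟩
          have hk1 : (a - 1 - 1) = ((idx - 1 : Nat) : Int) := by omega
          rw [hk1, PySem.List.pyGetD_natCast] at g2
          refine ⟨hidxn, ?_⟩
          rw [hgetd1, pv_dv_getD _ _ (by rw [hlen']; omega), if_pos (by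
            rw [pvDvP, Bool.and_eq_true, decide_eq_true_iff, decide_eq_true_iff]
            exact ⟨by omega, by rw [hgb]; exact g2⟩)]
          norm_num)
        (by
          intro hc
          rw [hgetd1, pv_dv_getD _ _ (by rw [hlen']; omega), if_neg (by
            rw [pvDvP, Bool.and_eq_true, decide_eq_true_iff, decide_eq_true_iff]
            rintro ⟨g1, g2⟩
            apply hc
            have hk1 : (a - 1 - 1) = ((idx - 1 : Nat) : Int) := by omega
            rw [hk1, PySem.List.pyGetD_natCast]
            rw [hgb] at g2
            exact ⟨by omega, g2⟩)])]
      rw [show ((a - 1 + 1) + 1).toNat = (idx + 1) + 1 from by omega]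
      rw [pv_cond_add n _ (by rw [List.length_set, hdv1len]) (idx + 1) 1
        ((pvDv ords').getD (idx + 1) 0) _
        (by
          rintro ⟨g1, g2⟩
          have hk1 : (a - 1 + 1) = ((idx + 1 : Nat) : Int) := by omega
          rw [hk1, PySem.List.pyGetD_natCast] at g2
          refine ⟨by omega, ?_⟩
          rw [pv_getD_set_ne _ _ _ _ (by omega), List.getD_eq_getElem?_getD,
            List.getElem?_set_self (by rw [List.length_set, hdvlen]; omega), Option.getD_some,
            pv_dv_getD _ _ (by rw [hlen']; omega), if_pos (by
              rw [pvDvP, Bool.and_eq_true, decide_eq_true_iff, decide_eq_true_iff]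
              refine ⟨by omega, ?_⟩
              rw [Nat.add_sub_cancel, hgb]
              exact g2)]
          norm_num)
        (by
          intro hc
          rw [pv_getD_set_ne _ _ _ _ (by omega)]
          by_cases hbig : idx + 1 < n
          · rw [List.getD_eq_getElem?_getD,
              List.getElem?_set_self (by rw [List.length_set, hdvlen]; omega), Option.getD_some,
              pv_dv_getD _ _ (by rw [hlen']; omega), if_neg (by
                rw [pvDvP, Bool.and_eq_true, decide_eq_true_iff, decide_eq_true_iff]
                rintro ⟨g1, g2⟩
                apply hc
                have hk1 : (a - 1 + 1) = ((idx + 1 : Nat) : Int) := by omega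
                rw [hk1, PySem.List.pyGetD_natCast]
                rw [Nat.add_sub_cancel, hgb] at g2
                exact ⟨by omega, g2⟩)]
          · rw [List.getD_eq_getElem?_getD,
              List.getElem?_eq_none (by rw [List.length_set, List.length_set, hdvlen]; omega)]
            rw [pv_dv_getD_big _ _ (by rw [hlen']; omega)]
            rfl)]
      rw [hords'def, pv_dv_update ords idx b (by omega)]
    -- letter buckets
    · rw [PySem.List.getD_map_range _ _ _ _ hβb, htn1]
      by_cases hββ : βb = βo
      · have hbo : PySem.Int.mod (b - 97) 26 = ((βo : Nat) : Int) := hββ ▸ hβbc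
        rw [if_pos hββ]
        rw [pvBitAdd_treeOf n _ (idx + 1) 1 (by rw [List.length_set, pv_cv_length, hlen])
          (by omega) (by omega), Nat.add_sub_cancel]
        rw [List.getD_eq_getElem?_getD, List.getElem?_set_self (by rw [pv_cv_length]; omega),
          Option.getD_some]
        have hcoll : ((pvCv ords ((βo : Int))).set idx 0).set idx ((0 : Int) + 1) =
            pvCv ords' ((βo : Int)) := by
          rw [List.set_set]
          have hpc := pv_cv_set ords ((βo : Int)) b idx (by omega)
          rw [if_pos hbo] at hpc
          rw [show (0 : Int) + 1 = 1 from by norm_num, hpc, hords'def]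
        rw [hcoll, pv_map_range_set _ _ _ _ hβb]
        apply List.map_congr_left
        intro b' hb'
        rw [List.mem_range] at hb'
        by_cases hb'β : b' = βb
        · rw [if_pos hb'β, hb'β, hββ]
        · rw [if_neg hb'β, if_neg (by omega : ¬ b' = βo)]
          congr 1
          have hpc := pv_cv_set ords ((b' : Int)) b idx (by omega)
          rw [if_neg (by omega), ← hords'def] at hpc
          rw [← hpc, pv_set_zero_eq _ _ (by rw [pv_cv_getD _ _ _ (by omega), ← hodef, if_neg (by omega)])]
      · rw [if_neg hββ]
        rw [pvBitAdd_treeOf n _ (idx + 1) 1 (by rw [pv_cv_length, hlen]) (by omega) (by omega),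
          Nat.add_sub_cancel, pv_cv_getD _ _ _ (by omega), ← hodef, if_neg (by omega)]
        have hcoll : (pvCv ords ((βb : Int))).set idx ((0 : Int) + 1) = pvCv ords' ((βb : Int)) := by
          have hpc := pv_cv_set ords ((βb : Int)) b idx (by omega)
          rw [if_pos hβbc] at hpc
          rw [show (0 : Int) + 1 = 1 from by norm_num, hpc, hords'def]
        rw [hcoll, pv_map_range_set _ _ _ _ hβb]
        apply List.map_congr_left
        intro b' hb'
        rw [List.mem_range] at hb'
        by_cases hb'β : b' = βb
        · rw [if_pos hb'β, hb'β]
        · rw [if_neg hb'β]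
          by_cases hb'o : b' = βo
          · rw [if_pos hb'o, hb'o]
            congr 1
            have hpc := pv_cv_set ords ((βo : Int)) b idx (by omega)
            rw [if_neg (by omega), ← hords'def] at hpc
            exact hpc
          · rw [if_neg hb'o]
            congr 1
            have hpc := pv_cv_set ords ((b' : Int)) b idx (by omega)
            rw [if_neg (by omega), ← hords'def] at hpc
            rw [← hpc, pv_set_zero_eq _ _ (by rw [pv_cv_getD _ _ _ (by omega), ← hodef, if_neg (by omega)])]
  rw [hA2]
  refine ⟨hlen', ?_, rfl, rfl⟩
  intro v hvmem
  rcases List.mem_or_eq_of_mem_set hvmem with h | h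
  · exact hvv v h
  · omega

theorem pvPrefS_cv (ords : List Int) (c : Int) (m : Nat) :
    pvPrefS (pvCv ords c) m = (((ords.take m).countP (pvCvP c) : Nat) : Int) := by
  rw [pvPrefS, pvCv, ← List.map_take, PySem.List.sum_map_ite_one_zero]

theorem pvPrefS_dv (ords : List Int) (r : Nat) (hr : r ≤ ords.length) :
    pvPrefS (pvDv ords) r = (((List.range r).countP (pvDvP ords) : Nat) : Int) := by
  rw [pvPrefS, pvDv, ← List.map_take, List.take_range, Nat.min_eq_left hr,
    PySem.List.sum_map_ite_one_zero]

-- ---- B's canonical state: position lists as mapped filters of List.range ----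

def pvF (Q : Nat → Bool) (n : Nat) : List Int :=
  ((List.range n).filter Q).map (fun p => ((p : Nat) : Int))

def pvHiF (Q : Nat → Bool) (n t : Nat) : List Int :=
  (((List.range (n - (t + 1))).map (fun u => t + 1 + u)).filter Q).map (fun p => ((p : Nat) : Int))

def pvCD (ords : List Int) : List Int := pvF (pvDvP ords) ords.length

def pvCP (ords : List Int) (c : Int) : List Int :=
  pvF (fun p => pvCvP c (ords.getD p 0)) ords.length

def pvUpd (Q : Nat → Bool) (t : Nat) (v : Bool) : Nat → Bool :=
  fun p => if p = t then v else Q p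

theorem pvF_congr (Q Q' : Nat → Bool) (n : Nat) (h : ∀ p, p < n → Q p = Q' p) :
    pvF Q n = pvF Q' n := by
  unfold pvF
  congr 1
  apply List.filter_congr
  intro p hp
  exact h p (List.mem_range.mp hp)

theorem pvF_split (Q : Nat → Bool) (n t : Nat) (ht : t < n) :
    pvF Q n = pvF Q t ++ (if Q t then [((t : Nat) : Int)] else []) ++ pvHiF Q n t := by
  conv_lhs => rw [show n = (t + 1) + (n - (t + 1)) from by omega]
  unfold pvF pvHiF
  rw [List.range_add, List.range_succ, List.filter_append, List.filter_append,
    List.map_append, List.map_append]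
  by_cases hq : Q t <;> simp [hq]

theorem pvF_mem_lt (Q : Nat → Bool) (t : Nat) (x : Int) (hx : x ∈ pvF Q t) : x < (t : Int) := by
  rcases List.mem_map.mp hx with ⟨p, hp, rfl⟩
  have := List.mem_range.mp (List.mem_of_mem_filter hp)
  omega

theorem pvHiF_mem_gt (Q : Nat → Bool) (n t : Nat) (x : Int) (hx : x ∈ pvHiF Q n t) :
    (t : Int) < x := by
  rcases List.mem_map.mp hx with ⟨p, hp, rfl⟩
  rcases List.mem_map.mp (List.mem_of_mem_filter hp) with ⟨u, _, rfl⟩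
  omega

theorem pvHiF_congr (Q Q' : Nat → Bool) (n t : Nat) (h : ∀ p, p ≠ t → Q p = Q' p) :
    pvHiF Q n t = pvHiF Q' n t := by
  unfold pvHiF
  congr 1
  apply List.filter_congr
  intro p hp
  rcases List.mem_map.mp hp with ⟨u, _, rfl⟩
  exact h _ (by omega)

theorem pv_insertIdx_len (l r : List Int) (x : Int) :
    (l ++ r).insertIdx l.length x = l ++ x :: r := by
  induction l with
  | nil => rfl
  | cons a l ih => simpa [List.insertIdx_succ_cons] using ih

theorem pv_eraseIdx_len (l r : List Int) (x : Int) :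
    (l ++ x :: r).eraseIdx l.length = l ++ r := by
  induction l with
  | nil => rfl
  | cons a l ih => simpa using ih

theorem pv_getD_append_len (l r : List Int) :
    (l ++ r).getD l.length 0 = r.getD 0 0 := by
  induction l with
  | nil => rfl
  | cons a l ih => simpa using ih

theorem pv_bisL_at (Q : Nat → Bool) (n t : Nat) (ht : t < n) :
    pvBisL (pvF Q n) ((t : Nat) : Int) = (pvF Q t).length := by
  rw [pvF_split Q n t ht, pvBisL, List.countP_append, List.countP_append]
  have h1 : (pvF Q t).countP (fun y => decide (y < ((t : Nat) : Int))) = (pvF Q t).length :=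
    List.countP_eq_length.mpr (fun x hx => decide_eq_true (pvF_mem_lt Q t x hx))
  have h2 : ((if Q t then [((t : Nat) : Int)] else []) : List Int).countP
      (fun y => decide (y < ((t : Nat) : Int))) = 0 := by
    by_cases hq : Q t <;> simp [hq]
  have h3 : (pvHiF Q n t).countP (fun y => decide (y < ((t : Nat) : Int))) = 0 :=
    List.countP_eq_zero.mpr (fun x hx => by
      have := pvHiF_mem_gt Q n t x hx
      simp; omega)
  omega

theorem pv_bisR_at (Q : Nat → Bool) (n t : Nat) (ht : t < n) (hq : ¬ Q t = true) :
    pvBisR (pvF Q n) ((t : Nat) : Int) = (pvF Q t).length := by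
  rw [pvF_split Q n t ht, if_neg hq, List.append_nil, pvBisR, List.countP_append]
  have h1 : (pvF Q t).countP (fun y => decide (y ≤ ((t : Nat) : Int))) = (pvF Q t).length :=
    List.countP_eq_length.mpr (fun x hx => decide_eq_true (by
      have := pvF_mem_lt Q t x hx; omega))
  have h3 : (pvHiF Q n t).countP (fun y => decide (y ≤ ((t : Nat) : Int))) = 0 :=
    List.countP_eq_zero.mpr (fun x hx => by
      have := pvHiF_mem_gt Q n t x hx
      simp; omega)
  omega

theorem pv_present_iff (Q : Nat → Bool) (n t : Nat) (ht : t < n) :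
    (pvBisL (pvF Q n) ((t : Nat) : Int) < (pvF Q n).length ∧
      (pvF Q n).getD (pvBisL (pvF Q n) ((t : Nat) : Int)) 0 = ((t : Nat) : Int)) ↔ Q t = true := by
  rw [pv_bisL_at Q n t ht, pvF_split Q n t ht]
  by_cases hq : Q t
  · rw [if_pos hq]
    refine iff_of_true ⟨by simp, ?_⟩ hq
    rw [List.append_assoc, pv_getD_append_len]
    simp
  · rw [if_neg hq, List.append_nil]
    refine iff_of_false ?_ hq
    rintro ⟨hlt, heq⟩
    rw [pv_getD_append_len] at heq
    cases hhi : pvHiF Q n t with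
    | nil =>
      rw [hhi] at hlt
      simp at hlt
    | cons h rest =>
      rw [hhi] at heq
      have : ((t : Nat) : Int) < h := pvHiF_mem_gt Q n t h (hhi ▸ List.mem_cons_self)
      simp at heq
      omega

theorem pv_erase_canon (Q : Nat → Bool) (n t : Nat) (ht : t < n) (hq : Q t = true) :
    (pvF Q n).eraseIdx (pvBisL (pvF Q n) ((t : Nat) : Int)) = pvF (pvUpd Q t false) n := by
  rw [pv_bisL_at Q n t ht]
  conv_lhs => rw [pvF_split Q n t ht, if_pos hq, List.append_assoc, List.singleton_append]
  rw [pv_eraseIdx_len]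
  rw [pvF_split (pvUpd Q t false) n t ht, if_neg (by simp [pvUpd]), List.append_nil]
  rw [pvF_congr Q (pvUpd Q t false) t (fun p hp => by simp only [pvUpd]; rw [if_neg (by omega)]),
    pvHiF_congr Q (pvUpd Q t false) n t (fun p hp => by simp only [pvUpd]; rw [if_neg hp])]

theorem pv_insert_len (Q : Nat → Bool) (n t : Nat) (ht : t < n) (hq : ¬ Q t = true) :
    (pvF Q n).insertIdx (pvF Q t).length ((t : Nat) : Int) = pvF (pvUpd Q t true) n := by
  conv_lhs => rw [pvF_split Q n t ht, if_neg hq, List.append_nil]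
  rw [pv_insertIdx_len]
  rw [pvF_split (pvUpd Q t true) n t ht, if_pos (by simp [pvUpd]), List.append_assoc,
    List.singleton_append]
  rw [pvF_congr Q (pvUpd Q t true) t (fun p hp => by simp only [pvUpd]; rw [if_neg (by omega)]),
    pvHiF_congr Q (pvUpd Q t true) n t (fun p hp => by simp only [pvUpd]; rw [if_neg hp])]

theorem pv_insert_canon (Q : Nat → Bool) (n t : Nat) (ht : t < n) (hq : ¬ Q t = true) :
    (pvF Q n).insertIdx (pvBisR (pvF Q n) ((t : Nat) : Int)) ((t : Nat) : Int) =
      pvF (pvUpd Q t true) n := by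
  rw [pv_bisR_at Q n t ht hq]
  exact pv_insert_len Q n t ht hq

theorem pv_insertL_canon (Q : Nat → Bool) (n t : Nat) (ht : t < n) (hq : ¬ Q t = true) :
    (pvF Q n).insertIdx (pvBisL (pvF Q n) ((t : Nat) : Int)) ((t : Nat) : Int) =
      pvF (pvUpd Q t true) n := by
  rw [pv_bisL_at Q n t ht]
  exact pv_insert_len Q n t ht hq

theorem pv_bisL_big (Q : Nat → Bool) (n : Nat) (x : Int) (hx : (n : Int) ≤ x) :
    pvBisL (pvF Q n) x = (pvF Q n).length :=
  List.countP_eq_length.mpr (fun y hy => decide_eq_true (by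
    rcases List.mem_map.mp hy with ⟨p, hp, rfl⟩
    have := List.mem_range.mp (List.mem_of_mem_filter hp)
    omega))

-- `fix_down i` rewrites the canonical descent list at position i to its true value
theorem pvFixDown_canon (n : Nat) (ords : List Int) (Q : Nat → Bool) (i : Int)
    (h0 : 0 ≤ i) (hlen : ords.length = n) :
    pvFixDown n ords (pvF Q n) i =
      pvF (fun p => if ((p : Nat) : Int) = i then pvDvP ords p else Q p) n := by
  by_cases hin : i < (n : Int)
  · set t := i.toNat with htdef
    have hti : ((t : Nat) : Int) = i := by omega
    have htn : t < n := by omega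
    have hdv : (0 < i ∧ i < (n : Int) ∧
        PySem.List.pyGetD ords i 0 < PySem.List.pyGetD ords (i - 1) 0) ↔ pvDvP ords t = true := by
      rw [pvDvP, Bool.and_eq_true, decide_eq_true_iff, decide_eq_true_iff]
      constructor
      · rintro ⟨g1, _, g2⟩
        rw [show i = ((t : Nat) : Int) from hti.symm,
          show ((t : Nat) : Int) - 1 = ((t - 1 : Nat) : Int) from by omega,
          PySem.List.pyGetD_natCast, PySem.List.pyGetD_natCast] at g2
        exact ⟨by omega, g2⟩
      · rintro ⟨g1, g2⟩
        refine ⟨by omega, by omega, ?_⟩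
        rw [show i = ((t : Nat) : Int) from hti.symm,
          show ((t : Nat) : Int) - 1 = ((t - 1 : Nat) : Int) from by omega,
          PySem.List.pyGetD_natCast, PySem.List.pyGetD_natCast]
        exact g2
    have htarget : pvF (fun p => if ((p : Nat) : Int) = i then pvDvP ords p else Q p) n =
        pvF (pvUpd Q t (pvDvP ords t)) n := by
      apply pvF_congr
      intro p hp
      by_cases hpt : p = t
      · subst hpt
        rw [if_pos hti, pvUpd, if_pos rfl]
      · rw [if_neg (by omega), pvUpd, if_neg hpt]
    rw [htarget]
    unfold pvFixDown
    by_cases hd : pvDvP ords t = true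
    · rw [if_pos (hdv.mpr hd)]
      by_cases hq : Q t = true
      · rw [if_neg (by
          rw [← hti]
          simpa using (pv_present_iff Q n t htn).mpr hq)]
        apply pvF_congr
        intro p hp
        by_cases hpt : p = t
        · subst hpt; rw [pvUpd, if_pos rfl, hq, hd]
        · rw [pvUpd, if_neg hpt]
      · rw [if_pos (by
          rw [← hti]
          intro hcon
          exact hq ((pv_present_iff Q n t htn).mp hcon))]
        rw [← hti, pv_insertL_canon Q n t htn hq]
        apply pvF_congr
        intro p hp
        by_cases hpt : p = t
        · subst hpt; rw [pvUpd, pvUpd, if_pos rfl, if_pos rfl, hd]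
        · rw [pvUpd, pvUpd, if_neg hpt, if_neg hpt]
    · rw [if_neg (fun hcon => hd (hdv.mp hcon))]
      have hdf : pvDvP ords t = false := by simpa using hd
      by_cases hq : Q t = true
      · rw [if_pos (by rw [← hti]; exact (pv_present_iff Q n t htn).mpr hq)]
        rw [← hti, pv_erase_canon Q n t htn hq]
        apply pvF_congr
        intro p hp
        by_cases hpt : p = t
        · subst hpt; rw [pvUpd, pvUpd, if_pos rfl, if_pos rfl, hdf]
        · rw [pvUpd, pvUpd, if_neg hpt, if_neg hpt]
      · rw [if_neg (by
          rw [← hti]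
          intro hcon
          exact hq ((pv_present_iff Q n t htn).mp hcon))]
        apply pvF_congr
        intro p hp
        by_cases hpt : p = t
        · subst hpt
          rw [pvUpd, if_pos rfl, hdf]
          simpa using hq
        · rw [pvUpd, if_neg hpt]
  · -- i ≥ n: nothing to fix, and no position of range n is i
    unfold pvFixDown
    rw [if_neg (by omega)]
    rw [if_neg (by
      rw [pv_bisL_big Q n i (by omega)]
      simp)]
    exact pvF_congr _ _ n (fun p hp => by rw [if_neg (by omega)])

-- ---- bisect counts vs prefix counts ----

theorem pv_bisL_cnt (Q : Nat → Bool) (n : Nat) (x : Int) (h0 : 0 ≤ x) (hx : x ≤ (n : Int)) :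
    pvBisL (pvF Q n) x = (List.range x.toNat).countP Q := by
  set m := x.toNat with hm
  rw [pvBisL, pvF, List.countP_map, List.countP_filter,
    show n = m + (n - m) from by omega, List.range_add, List.countP_append]
  have h1 : (List.range m).countP
      (fun a => ((fun y => decide (y < x)) ∘ (fun p : Nat => ((p : Nat) : Int))) a && Q a) =
      (List.range m).countP Q :=
    List.countP_congr (fun a ha => by
      have hlt : a < m := List.mem_range.mp ha
      simp only [Function.comp_apply, Bool.and_eq_true, decide_eq_true_iff]
      constructor
      · rintro ⟨_, h⟩; exact h
      · intro h; exact ⟨by omega, h⟩)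
  have h2 : ((List.range (n - m)).map (fun u => m + u)).countP
      (fun a => ((fun y => decide (y < x)) ∘ (fun p : Nat => ((p : Nat) : Int))) a && Q a) = 0 :=
    List.countP_eq_zero.mpr (fun a ha => by
      rcases List.mem_map.mp ha with ⟨u, _, rfl⟩
      simp only [Function.comp_apply, Bool.and_eq_true, decide_eq_true_iff]
      rintro ⟨hcon, _⟩
      omega)
  omega

theorem pv_take_map_range (ords : List Int) (m : Nat) (hm : m ≤ ords.length) :
    ords.take m = (List.range m).map (fun p => ords.getD p 0) := by
  apply List.ext_getElem (by simp; omega)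
  intro j hj hj2
  simp only [List.getElem_take, List.getElem_map, List.getElem_range]
  rw [List.getD_eq_getElem?_getD, List.getElem?_eq_getElem (by simp at hj; omega)]
  rfl

theorem pv_take_countP (ords : List Int) (P : Int → Bool) (m : Nat) (hm : m ≤ ords.length) :
    (ords.take m).countP P = (List.range m).countP (fun p => P (ords.getD p 0)) := by
  rw [pv_take_map_range ords m hm, List.countP_map]
  rfl

theorem pv_bisR_as_bisL (l : List Int) (x : Int) : pvBisR l x = pvBisL l (x + 1) := by
  unfold pvBisR pvBisL
  apply List.countP_congr
  intro y _
  simp only [decide_eq_true_iff]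
  omega

theorem pvF_succ (Q : Nat → Bool) (k : Nat) :
    pvF Q (k + 1) = pvF Q k ++ (if Q k then [((k : Nat) : Int)] else []) := by
  unfold pvF
  rw [List.range_succ, List.filter_append, List.map_append]
  by_cases hq : Q k <;> simp [hq]

theorem pvF_length (Q : Nat → Bool) (n : Nat) :
    (pvF Q n).length = (List.range n).countP Q := by
  rw [pvF, List.length_map, ← List.countP_eq_length_filter]

-- the descent predicate only depends on positions t and t+1 of a point update
theorem pv_dvP_set_out (ords : List Int) (t : Nat) (b : Int) (p : Nat)
    (hp1 : p ≠ t) (hp2 : p ≠ t + 1) :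
    pvDvP (ords.set t b) p = pvDvP ords p := by
  cases p with
  | zero => simp [pvDvP]
  | succ q =>
    unfold pvDvP
    rw [pv_getD_set_ne _ _ _ _ (by omega), Nat.add_sub_cancel,
      pv_getD_set_ne _ _ _ _ (by omega)]

-- B's two fix_down calls rebuild the canonical descent list of the updated ords
theorem pvDowns_update (n : Nat) (ords : List Int) (a b : Int)
    (hlen : ords.length = n) (ha : 1 ≤ a ∧ a ≤ (n : Int)) :
    pvFixDown n (ords.set (a - 1).toNat b)
      (pvFixDown n (ords.set (a - 1).toNat b) (pvF (pvDvP ords) n) (a - 1)) ((a - 1) + 1)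
      = pvF (pvDvP (ords.set (a - 1).toNat b)) n := by
  set ords' := ords.set (a - 1).toNat b with hods
  have hlen' : ords'.length = n := by rw [hods, List.length_set, hlen]
  rw [pvFixDown_canon n ords' (pvDvP ords) (a - 1) (by omega) hlen']
  rw [pvFixDown_canon n ords' _ ((a - 1) + 1) (by omega) hlen']
  apply pvF_congr
  intro p hp
  by_cases hp1 : ((p : Nat) : Int) = (a - 1) + 1
  · rw [if_pos hp1]
  · rw [if_neg hp1]
    by_cases hp0 : ((p : Nat) : Int) = a - 1
    · rw [if_pos hp0]
    · rw [if_neg hp0, hods, pv_dvP_set_out ords _ b p (by omega) (by omega)]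

-- B's bucket-list update (erase old position, insert it into the new letter's list)
theorem pvPos_update (n : Nat) (ords : List Int) (a b : Int)
    (hlen : ords.length = n) (ha : 1 ≤ a ∧ a ≤ (n : Int)) :
    pvPosStep
      ((List.range 26).map
        (fun β : Nat => pvF (fun p => pvCvP ((β : Nat) : Int) (ords.getD p 0)) n))
      (PySem.List.pyGetD ords (a - 1) 0) b (a - 1)
    = (List.range 26).map
        (fun β : Nat => pvF (fun p => pvCvP ((β : Nat) : Int) ((ords.set (a - 1).toNat b).getD p 0)) n) := by
  unfold pvPosStep
  set idx := (a - 1).toNat with hidxdef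
  have hidxn : idx < n := by omega
  have hcast : (a - 1) = ((idx : Nat) : Int) := by omega
  have ho : PySem.List.pyGetD ords (a - 1) 0 = ords.getD idx 0 := by
    rw [hcast, PySem.List.pyGetD_natCast]
  set o := ords.getD idx 0 with hodef
  set βo := (PySem.Int.mod (o - 97) 26).toNat with hβodef
  have hmo0 : 0 ≤ PySem.Int.mod (o - 97) 26 := PySem.Int.mod_nonneg _ (by norm_num)
  have hmo1 : PySem.Int.mod (o - 97) 26 < 26 := PySem.Int.mod_lt _ (by norm_num)
  have hβo : βo < 26 := by omega
  have hβoc : PySem.Int.mod (o - 97) 26 = ((βo : Nat) : Int) := by omega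
  set βn := (PySem.Int.mod (b - 97) 26).toNat with hβndef
  have hmb0 : 0 ≤ PySem.Int.mod (b - 97) 26 := PySem.Int.mod_nonneg _ (by norm_num)
  have hmb1 : PySem.Int.mod (b - 97) 26 < 26 := PySem.Int.mod_lt _ (by norm_num)
  have hβn : βn < 26 := by omega
  have hβnc : PySem.Int.mod (b - 97) 26 = ((βn : Nat) : Int) := by omega
  dsimp only
  rw [ho, ← hβodef]
  set Qo := fun p => pvCvP ((βo : Nat) : Int) (ords.getD p 0) with hQo
  have hQot : Qo idx = true := by
    rw [hQo]
    show pvCvP ((βo : Nat) : Int) (ords.getD idx 0) = true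
    rw [← hodef]
    exact decide_eq_true hβoc
  rw [PySem.List.getD_map_range _ _ _ _ hβo, ← hQo, hcast,
    pv_erase_canon Qo n idx hidxn hQot]
  have hgb : (ords.set idx b).getD idx 0 = b := by
    rw [List.getD_eq_getElem?_getD, List.getElem?_set_self (by omega), Option.getD_some]
  rw [pv_map_range_set _ _ _ _ hβo]
  by_cases hββ : βn = βo
  · -- the updated letter falls in the same bucket as the old one
    rw [PySem.List.getD_map_range _ _ _ _ hβn, if_pos hββ]
    rw [pv_insert_canon (pvUpd Qo idx false) n idx hidxn (by simp [pvUpd])]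
    rw [pv_map_range_set _ _ _ _ hβn]
    apply List.map_congr_left
    intro β hβ
    rw [List.mem_range] at hβ
    by_cases h1 : β = βn
    · rw [if_pos h1, h1]
      apply pvF_congr
      intro p hp
      by_cases hpt : p = idx
      · subst hpt
        rw [pvUpd, if_pos rfl, hgb]
        exact (decide_eq_true hβnc).symm
      · rw [pvUpd, if_neg hpt, pvUpd, if_neg hpt, hQo, hββ,
          pv_getD_set_ne _ _ _ _ (by omega)]
    · rw [if_neg h1, if_neg (by omega : ¬ β = βo)]
      apply pvF_congr
      intro p hp
      by_cases hpt : p = idx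
      · subst hpt
        rw [← hodef, hgb]
        rw [show pvCvP ((β : Nat) : Int) o = false from
          decide_eq_false (by rw [hβoc]; intro hcon; apply h1; omega)]
        rw [show pvCvP ((β : Nat) : Int) b = false from
          decide_eq_false (by rw [hβnc]; intro hcon; apply h1; omega)]
      · rw [pv_getD_set_ne _ _ _ _ (by omega)]
  · -- the updated letter moves to a different bucket
    rw [PySem.List.getD_map_range _ _ _ _ hβn, if_neg hββ]
    set Qn := fun p => pvCvP ((βn : Nat) : Int) (ords.getD p 0) with hQn
    have hQnt : ¬ Qn idx = true := by
      rw [hQn]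
      show ¬ pvCvP ((βn : Nat) : Int) (ords.getD idx 0) = true
      rw [← hodef]
      unfold pvCvP
      simp only [decide_eq_true_iff]
      rw [hβoc]
      intro hcon
      apply hββ
      omega
    rw [pv_insert_canon Qn n idx hidxn hQnt]
    rw [pv_map_range_set _ _ _ _ hβn]
    apply List.map_congr_left
    intro β hβ
    rw [List.mem_range] at hβ
    by_cases h1 : β = βn
    · rw [if_pos h1, h1]
      apply pvF_congr
      intro p hp
      by_cases hpt : p = idx
      · subst hpt
        rw [pvUpd, if_pos rfl, hgb]
        exact (decide_eq_true hβnc).symm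
      · rw [pvUpd, if_neg hpt, hQn, pv_getD_set_ne _ _ _ _ (by omega)]
    · rw [if_neg h1]
      by_cases h2 : β = βo
      · rw [if_pos h2, h2]
        apply pvF_congr
        intro p hp
        by_cases hpt : p = idx
        · subst hpt
          rw [pvUpd, if_pos rfl, hgb]
          exact (decide_eq_false (by rw [hβnc]; intro hcon; apply hββ; omega)).symm
        · rw [pvUpd, if_neg hpt, hQo, pv_getD_set_ne _ _ _ _ (by omega)]
      · rw [if_neg h2]
        apply pvF_congr
        intro p hp
        by_cases hpt : p = idx
        · subst hpt
          rw [← hodef, hgb]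
          rw [show pvCvP ((β : Nat) : Int) o = false from
            decide_eq_false (by rw [hβoc]; intro hcon; apply h2; omega)]
          rw [show pvCvP ((β : Nat) : Int) b = false from
            decide_eq_false (by rw [hβnc]; intro hcon; apply h1; omega)]
        · rw [pv_getD_set_ne _ _ _ _ (by omega)]

-- ---- B's builds produce the canonical lists ----

theorem pvBuildDowns_canon (ords : List Int) :
    pvBuildDowns ords = pvF (pvDvP ords) ords.length := by
  unfold pvBuildDowns pvF
  rw [PySem.List.pyRange_one]
  cases hn : ords.length with
  | zero => simp
  | succ m =>
    rw [List.range_succ_eq_map]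
    rw [show ((((m + 1 : Nat) : Int)) - 1).toNat = m from by omega]
    rw [List.filter_map, List.filter_cons_of_neg (by simp [pvDvP]), List.filter_map]
    have hpred : ∀ k, k ∈ List.range m →
        ((fun i => decide (PySem.List.pyGetD ords i 0 < PySem.List.pyGetD ords (i - 1) 0)) ∘
          (fun k : Nat => (1 : Int) + (k : Int))) k = (pvDvP ords ∘ Nat.succ) k := by
      intro k _
      simp only [Function.comp_apply, pvDvP]
      rw [show (1 : Int) + (k : Int) = ((k + 1 : Nat) : Int) from by omega,
        PySem.List.pyGetD_natCast,
        show (((k + 1 : Nat) : Int)) - 1 = ((k : Nat) : Int) from by omega,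
        PySem.List.pyGetD_natCast]
      rw [show Nat.succ k = k + 1 from rfl]
      simp only [Nat.add_sub_cancel]
      rw [show decide (1 ≤ k + 1) = true from by simp, Bool.true_and]
  -- same filtered list, mapped by equal functions
    rw [List.filter_congr hpred, List.map_map]
    apply List.map_congr_left
    intro k _
    simp only [Function.comp_apply]
    omega

theorem pvBuildPos_go (n : Nat) (full : List Int) (hlen : full.length = n) :
    ∀ (suf : List Int) (k : Nat), suf = full.drop k → k ≤ n →
    (PySem.List.enumerate suf (k : Int)).foldl
      (fun pos iv =>
        let β := (PySem.Int.mod (iv.2 - 97) 26).toNat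
        pos.set β (pos.getD β [] ++ [iv.1]))
      ((List.range 26).map
        (fun β : Nat => pvF (fun p => pvCvP ((β : Nat) : Int) (full.getD p 0)) k))
      = (List.range 26).map
          (fun β : Nat => pvF (fun p => pvCvP ((β : Nat) : Int) (full.getD p 0)) n) := by
  intro suf
  induction suf with
  | nil =>
    intro k hk hkn
    have hkeq : k = n := by
      have := congrArg List.length hk
      simp [List.length_drop, hlen] at this
      omega
    subst hkeq
    simp [PySem.List.enumerate]
  | cons c rest ih =>
    intro k hdrop hkn
    have hklen : k < n := by
      have := congrArg List.length hdrop
      simp [List.length_drop, hlen] at this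
      omega
    have hc : full.getD k 0 = c := by
      have h0 : (full.drop k)[0]? = some c := by rw [← hdrop]; rfl
      rw [List.getElem?_drop, Nat.add_zero] at h0
      rw [List.getD_eq_getElem?_getD, h0]
      rfl
    have hrest : rest = full.drop (k + 1) := by
      rw [← List.tail_drop, ← hdrop]; rfl
    rw [pv_enum_cons, List.foldl_cons]
    set β := (PySem.Int.mod (c - 97) 26).toNat with hβdef
    have hm0 : 0 ≤ PySem.Int.mod (c - 97) 26 := PySem.Int.mod_nonneg _ (by norm_num)
    have hm1 : PySem.Int.mod (c - 97) 26 < 26 := PySem.Int.mod_lt _ (by norm_num)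
    have hβ : β < 26 := by omega
    have hβc : PySem.Int.mod (c - 97) 26 = ((β : Nat) : Int) := by omega
    have hstep :
        (((List.range 26).map
            (fun β' : Nat => pvF (fun p => pvCvP ((β' : Nat) : Int) (full.getD p 0)) k)).set β
          ((((List.range 26).map
              (fun β' : Nat => pvF (fun p => pvCvP ((β' : Nat) : Int) (full.getD p 0)) k)).getD β [])
            ++ [(k : Int)]))
        = (List.range 26).map
            (fun β' : Nat => pvF (fun p => pvCvP ((β' : Nat) : Int) (full.getD p 0)) (k + 1)) := by
      rw [PySem.List.getD_map_range _ _ _ _ hβ, pv_map_range_set _ _ _ _ hβ]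
      apply List.map_congr_left
      intro β' hβ'
      rw [List.mem_range] at hβ'
      by_cases h1 : β' = β
      · have hft : pvCvP ((β : Nat) : Int) (full.getD k 0) = true := by
          rw [hc]; exact decide_eq_true hβc
        rw [if_pos h1, h1, pvF_succ, hft, if_pos rfl]
      · have hff : pvCvP ((β' : Nat) : Int) (full.getD k 0) = false := by
          rw [hc]
          exact decide_eq_false (by rw [hβc]; intro hcon; apply h1; omega)
        rw [if_neg h1, pvF_succ, hff, if_neg (by simp), List.append_nil]
    have ih' := ih (k + 1) hrest (by omega)
    rw [show (((k + 1 : Nat) : Int)) = (k : Int) + 1 from by push_cast; ring] at ih'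
    refine Eq.trans ?_ ih'
    dsimp only
    rw [hstep]

theorem pvBuildPos_canon (ords : List Int) :
    pvBuildPos ords = (List.range 26).map
      (fun β : Nat => pvF (fun p => pvCvP ((β : Nat) : Int) (ords.getD p 0)) ords.length) := by
  have h0 := pvBuildPos_go ords.length ords rfl ords 0 (by simp) (by omega)
  have hinit : ((List.range 26).map
      (fun β : Nat => pvF (fun p => pvCvP ((β : Nat) : Int) (ords.getD p 0)) 0))
      = List.replicate 26 [] := by
    apply List.eq_replicate_iff.mpr
    refine ⟨by simp, ?_⟩
    intro x hx
    rcases List.mem_map.mp hx with ⟨b, _, rfl⟩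
    simp [pvF]
  rw [hinit] at h0
  rw [pvBuildPos, show ((0 : Int)) = ((0 : Nat) : Int) from rfl]
  exact h0

-- ---- the two query tests agree ----

theorem pv_bisL_cnt_clamp (Q : Nat → Bool) (n : Nat) (x : Int) :
    pvBisL (pvF Q n) x = (List.range (min x (n : Int)).toNat).countP Q := by
  by_cases h0 : x < 0
  · rw [show (min x (n : Int)).toNat = 0 from by omega]
    simp only [List.range_zero, List.countP_nil]
    exact List.countP_eq_zero.mpr (fun y hy => by
      rcases List.mem_map.mp hy with ⟨p, hp, rfl⟩
      simp only [decide_eq_true_iff]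
      omega)
  · by_cases h1 : x ≤ (n : Int)
    · rw [show (min x (n : Int)).toNat = x.toNat from by omega]
      exact pv_bisL_cnt Q n x (by omega) h1
    · rw [show (min x (n : Int)).toNat = n from by omega, pv_bisL_big Q n x (by omega), pvF_length]

theorem pvDownCond_eq (n : Nat) (ords : List Int) (a b : Int) (hlen : ords.length = n) :
    (pvBitQueryRange n (pvTreeOf n (pvDv ords)) (a + 1) b ≠ 0) ↔
      (pvBisL (pvF (pvDvP ords) n) a ≠ pvBisL (pvF (pvDvP ords) n) b) := by
  rw [pvBitQueryRange, pvBitQuery_treeOf, pvBitQuery_treeOf,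
    show a + 1 - 1 = a from by ring,
    pvPrefS_dv _ _ (by omega), pvPrefS_dv _ _ (by omega),
    pv_bisL_cnt_clamp _ n a, pv_bisL_cnt_clamp _ n b]
  omega

theorem pvOk_eq (n : Nat) (ords : List Int) (a b : Int) (hlen : ords.length = n) (lst : List Int) :
    pvOkA n ((List.range 26).map (fun β : Nat => pvTreeOf n (pvCv ords ((β : Nat) : Int)))) a b lst
      = pvOkB ((List.range 26).map
          (fun β : Nat => pvF (fun p => pvCvP ((β : Nat) : Int) (ords.getD p 0)) n)) a b lst := by
  induction lst with
  | nil => rfl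
  | cons k rest ih =>
    have hm0 : 0 ≤ PySem.Int.mod k 26 := PySem.Int.mod_nonneg _ (by norm_num)
    have hm1 : PySem.Int.mod k 26 < 26 := PySem.Int.mod_lt _ (by norm_num)
    set β := (PySem.Int.mod k 26).toNat with hβdef
    have hβ : β < 26 := by omega
    -- the A-side values as prefix counts
    have hA1 : pvBitQueryRange n
        (((List.range 26).map (fun β' : Nat => pvTreeOf n (pvCv ords ((β' : Nat) : Int)))).getD β []) a b
        = (((List.range (min b (n : Int)).toNat).countP
            (fun p => pvCvP ((β : Nat) : Int) (ords.getD p 0)) : Nat) : Int) -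
          (((List.range (min (a - 1) (n : Int)).toNat).countP
            (fun p => pvCvP ((β : Nat) : Int) (ords.getD p 0)) : Nat) : Int) := by
      rw [PySem.List.getD_map_range _ _ _ _ hβ, pvBitQueryRange, pvBitQuery_treeOf,
        pvBitQuery_treeOf, pvPrefS_cv, pvPrefS_cv]
      rw [pv_take_countP _ _ _ (by omega), pv_take_countP _ _ _ (by omega)]
    have hA2 : pvBitQueryRange n
        (((List.range 26).map (fun β' : Nat => pvTreeOf n (pvCv ords ((β' : Nat) : Int)))).getD β []) 1 (n : Int)
        = (((List.range n).countP (fun p => pvCvP ((β : Nat) : Int) (ords.getD p 0)) : Nat) : Int) := by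
      rw [PySem.List.getD_map_range _ _ _ _ hβ, pvBitQueryRange, pvBitQuery_treeOf,
        pvBitQuery_treeOf, pvPrefS_cv, pvPrefS_cv]
      rw [show (min ((n : Int)) (n : Int)).toNat = n from by omega,
        show (min ((1 : Int) - 1) (n : Int)).toNat = 0 from by omega]
      rw [pv_take_countP _ _ _ (by omega)]
      simp
    -- the B-side values as the same prefix counts
    have hB1 : pvBisR (((List.range 26).map
        (fun β' : Nat => pvF (fun p => pvCvP ((β' : Nat) : Int) (ords.getD p 0)) n)).getD β []) (b - 1)
        = (List.range (min b (n : Int)).toNat).countP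
            (fun p => pvCvP ((β : Nat) : Int) (ords.getD p 0)) := by
      rw [PySem.List.getD_map_range _ _ _ _ hβ, pv_bisR_as_bisL,
        show b - 1 + 1 = b from by ring, pv_bisL_cnt_clamp]
    have hB2 : pvBisL (((List.range 26).map
        (fun β' : Nat => pvF (fun p => pvCvP ((β' : Nat) : Int) (ords.getD p 0)) n)).getD β []) (a - 1)
        = (List.range (min (a - 1) (n : Int)).toNat).countP
            (fun p => pvCvP ((β : Nat) : Int) (ords.getD p 0)) := by
      rw [PySem.List.getD_map_range _ _ _ _ hβ, pv_bisL_cnt_clamp]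
    have hB3 : (((List.range 26).map
        (fun β' : Nat => pvF (fun p => pvCvP ((β' : Nat) : Int) (ords.getD p 0)) n)).getD β []).length
        = (List.range n).countP (fun p => pvCvP ((β : Nat) : Int) (ords.getD p 0)) := by
      rw [PySem.List.getD_map_range _ _ _ _ hβ, pvF_length]
    rw [pvOkA, pvOkB]
    rw [← hβdef, hA1, hA2, hB1, hB2, hB3]
    by_cases hcond : (((List.range (min b (n : Int)).toNat).countP
          (fun p => pvCvP ((β : Nat) : Int) (ords.getD p 0)) : Nat) : Int) -
        (((List.range (min (a - 1) (n : Int)).toNat).countP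
          (fun p => pvCvP ((β : Nat) : Int) (ords.getD p 0)) : Nat) : Int) ≠
        (((List.range n).countP (fun p => pvCvP ((β : Nat) : Int) (ords.getD p 0)) : Nat) : Int)
    · rw [if_pos hcond, if_pos (by exact_mod_cast hcond)]
    · rw [if_neg hcond, if_neg (by omega), ih]

-- ---- the main loops agree ----

theorem pvLoop_eq (n : Nat) (ops : List (Int × Int × Int)) (ords down : List Int)
    (idxs : List (List Int)) (downs : List Int) (pos : List (List Int)) (res : List Bool)
    (hg : pvGood n ords down idxs)
    (hdowns : downs = pvF (pvDvP ords) n)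
    (hpos : pos = (List.range 26).map
      (fun β : Nat => pvF (fun p => pvCvP ((β : Nat) : Int) (ords.getD p 0)) n))
    (hops : ∀ o ∈ ops,
      (o.1 = 1 → 1 ≤ o.2.1 ∧ o.2.1 ≤ (n : Int) ∧ 71 ≤ o.2.2 ∧ o.2.2 ≤ 122) ∧
      (o.1 ≠ 1 → 1 - (n : Int) ≤ o.2.1 ∧ o.2.1 ≤ (n : Int) ∧
        1 - (n : Int) ≤ o.2.2 ∧ o.2.2 ≤ (n : Int))) :
    pvLoopA n ops ords down idxs res = pvLoopB n ops ords downs pos res := by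
  induction ops generalizing ords down idxs downs pos res with
  | nil => rw [pvLoopA, pvLoopB]
  | cons o rest ih =>
    obtain ⟨op, a, b⟩ := o
    have hop := hops _ List.mem_cons_self
    have hops' : ∀ o ∈ rest,
        (o.1 = 1 → 1 ≤ o.2.1 ∧ o.2.1 ≤ (n : Int) ∧ 71 ≤ o.2.2 ∧ o.2.2 ≤ 122) ∧
        (o.1 ≠ 1 → 1 - (n : Int) ≤ o.2.1 ∧ o.2.1 ≤ (n : Int) ∧
          1 - (n : Int) ≤ o.2.2 ∧ o.2.2 ≤ (n : Int)) :=
      fun o ho => hops o (List.mem_cons_of_mem _ ho)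
    obtain ⟨hlen, hvv, hdown, hidxs⟩ := hg
    rw [pvLoopA, pvLoopB]
    by_cases hop1 : op = 1
    · rw [if_pos hop1, if_pos hop1]
      obtain ⟨h1, h2, h3, h4⟩ := hop.1 hop1
      exact ih _ _ _ _ _ _
        (pvUpdate_good n ords down idxs a b ⟨hlen, hvv, hdown, hidxs⟩ ⟨h1, h2⟩ ⟨h3, h4⟩)
        (by rw [hdowns]; exact pvDowns_update n ords a b hlen ⟨h1, h2⟩)
        (by rw [hpos]; exact pvPos_update n ords a b hlen ⟨h1, h2⟩)
        hops'
    · rw [if_neg hop1, if_neg hop1]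
      subst hdown hidxs hdowns hpos
      by_cases hd : pvBitQueryRange n (pvTreeOf n (pvDv ords)) (a + 1) b ≠ 0
      · rw [if_pos hd, if_pos ((pvDownCond_eq n ords a b hlen).mp hd)]
        exact ih _ _ _ _ _ _ ⟨hlen, hvv, rfl, rfl⟩ rfl rfl hops'
      · rw [if_neg hd,
          if_neg (fun hb => hd ((pvDownCond_eq n ords a b hlen).mpr hb))]
        simp only [pvOk_eq n ords a b hlen]
        exact ih _ _ _ _ _ _ ⟨hlen, hvv, rfl, rfl⟩ rfl rfl hops'

-- ===== VERDICT (by name: the statement is the Claim_ definition above) =====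
theorem subStringOfSortedString_spec : Claim_equal_subStringOfSortedString := by
  intro s operations _ hpre
  unfold Spec_subStringOfSortedString subStringOfSortedString subStringOfSortedString_alt
  have hlen : (s.toList.map (fun c => (c.toNat : Int))).length = s.toList.length := by simp
  have hv : ∀ v ∈ s.toList.map (fun c => (c.toNat : Int)), 71 ≤ v ∧ v ≤ 122 := by
    intro v hvmem
    obtain ⟨c, hc, rfl⟩ := List.mem_map.mp hvmem
    have := List.all_eq_true.mp hpre.1 c hc
    simp only [Bool.and_eq_true, decide_eq_true_iff] at this
    omega
  refine pvLoop_eq _ _ _ _ _ _ _ _ (pvBuildA_good _ _ hlen hv) ?_ ?_ ?_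
  · rw [pvBuildDowns_canon, hlen]
  · rw [pvBuildPos_canon, hlen]
  · intro o ho
    have h := List.all_eq_true.mp hpre.2 o ho
    constructor
    · intro h1
      rw [if_pos h1] at h
      simp only [Bool.and_eq_true, decide_eq_true_iff] at h
      exact ⟨h.1.1.1, h.1.1.2, h.1.2, h.2⟩
    · intro h1
      rw [if_neg h1] at h
      simp only [Bool.and_eq_true, decide_eq_true_iff] at h
      exact ⟨by omega, by omega, by omega, by omega⟩
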